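-- pv_equiv track=rewrite | github.com/jjoshua2/arc_agi | unsolved/2025-10-02T21-13-22Z/6455b5f5_best1.py | transform
-- ===== SOURCE A (Python) =====
-- from collections import deque
-- from typing import List, Tuple
--
-- def transform(grid: List[List[int]]) -> List[List[int]]:
--     if not grid or not grid[0]:
--         return [row[:] for row in grid]
--     h = len(grid)
--     w = len(grid[0])
--     visited = [[False for _ in range(w)] for _ in range(h)]
--     directions = [(-1, 0), (1, 0), (0, -1), (0, 1)]  # up, down, left, right
--
--     def is_adjacent_to_two(r: int, c: int) -> bool:
--         for dr, dc in directions: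
--             nr, nc = r + dr, c + dc
--             if 0 <= nr < h and 0 <= nc < w and grid[nr][nc] == 2:
--                 return True
--         return False
--
--     def has_adjacent_two(comp: List[Tuple[int, int]]) -> bool:
--         for r, c in comp:
--             if is_adjacent_to_two(r, c):
--                 return True
--         return False
--
--     def touches_left(comp: List[Tuple[int, int]]) -> bool:
--         for r, c in comp:
--             if c == 0:
--                 return True
--         return False
--
--     def touches_top(comp: List[Tuple[int, int]]) -> bool:
--         for r, c in comp:
--             if r == 0:
--                 return True
--         return False
--
--     new_grid = [row[:] for row in grid]
--
--     for i in range(h):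
--         for j in range(w):
--             if grid[i][j] == 0 and not visited[i][j]:
--                 # BFS to find component
--                 component = []
--                 queue = deque([(i, j)])
--                 visited[i][j] = True
--                 while queue:
--                     r, c = queue.popleft()
--                     component.append((r, c))
--                     for dr, dc in directions:
--                         nr, nc = r + dr, c + dc
--                         if 0 <= nr < h and 0 <= nc < w and grid[nr][nc] == 0 and not visited[nr][nc]:
--                             visited[nr][nc] = True
--                             queue.append((nr, nc))
--                 # Check if adjacent to 2
--                 if not has_adjacent_two(component):
--                     continue  # Skip isolated 0s
--                 # Check touching conditions
--                 touch_left = touches_left(component)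
--                 touch_top = touches_top(component)
--                 if touch_left and not touch_top:
--                     continue  # Leave as 0
--                 # Fill based on size
--                 size = len(component)
--                 color = 8 if size <= 8 else 1
--                 for r, c in component:
--                     new_grid[r][c] = color
--
--     return new_grid
-- ===== SOURCE B (Python) =====
-- from typing import List
--
--
-- def transform(grid: List[List[int]]) -> List[List[int]]:
--     if not grid or not grid[0]:
--         return [row[:] for row in grid]
--     h = len(grid)
--     w = len(grid[0])
--
--     # union-find over linear indices of the h*w window
--     parent = list(range(h * w))
--
--     def find(x: int) -> int:
--         while parent[x] != x:
--             x = parent[x]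
--         return x
--
--     def union(a: int, b: int) -> None:
--         ra, rb = find(a), find(b)
--         if ra != rb:
--             if ra < rb:
--                 parent[rb] = ra
--             else:
--                 parent[ra] = rb
--
--     zeros = [(r, c) for r in range(h) for c in range(w) if grid[r][c] == 0]
--     for r, c in zeros:
--         if r + 1 < h and grid[r + 1][c] == 0:
--             union(r * w + c, (r + 1) * w + c)
--         if c + 1 < w and grid[r][c + 1] == 0:
--             union(r * w + c, r * w + c + 1)
--
--     # per-root aggregates: size, touches top, touches left, adjacent to a 2
--     size = {}
--     top = {}
--     left = {}
--     two = {}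
--     for r, c in zeros:
--         root = find(r * w + c)
--         size[root] = size.get(root, 0) + 1
--         top[root] = top.get(root, False) or r == 0
--         left[root] = left.get(root, False) or c == 0
--         near2 = any(grid[nr][nc] == 2
--                     for nr, nc in ((r - 1, c), (r + 1, c), (r, c - 1), (r, c + 1))
--                     if 0 <= nr < h and 0 <= nc < w)
--         two[root] = two.get(root, False) or near2
--
--     def cell(r: int, c: int) -> int:
--         v = grid[r][c]
--         if c < w and v == 0:
--             root = find(r * w + c)
--             if two[root] and not (left[root] and not top[root]):
--                 return 8 if size[root] <= 8 else 1
--         return v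
--
--     return [[cell(r, c) for c in range(len(grid[r]))] for r in range(h)]
-- ===== Notes on version B (the rewrite author's own statement) =====
-- stated objective: alternative
-- what changed: Replaces the BFS flood fill with mutable visited/new_grid arrays by a union-find over linear cell indices (one union pass over the zero cells, one grouping pass accumulating per-root size/top/left/adjacent-to-2 aggregates in dicts, then a pure per-cell rebuild of the grid).
import Mathlib
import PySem

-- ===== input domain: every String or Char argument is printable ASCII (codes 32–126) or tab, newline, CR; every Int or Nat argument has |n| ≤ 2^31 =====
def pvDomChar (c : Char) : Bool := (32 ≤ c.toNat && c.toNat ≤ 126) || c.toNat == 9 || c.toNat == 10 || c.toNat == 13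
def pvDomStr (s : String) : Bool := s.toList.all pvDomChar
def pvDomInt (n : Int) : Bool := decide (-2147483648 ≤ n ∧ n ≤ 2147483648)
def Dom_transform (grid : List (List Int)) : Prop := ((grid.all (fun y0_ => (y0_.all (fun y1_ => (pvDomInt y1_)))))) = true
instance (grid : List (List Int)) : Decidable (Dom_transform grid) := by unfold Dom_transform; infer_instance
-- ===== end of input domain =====

-- B re-implements the flood fill with a union-find (disjoint-set) over linear cell
-- indices plus one grouping pass building per-root aggregates; same return value,
-- different algorithm/data structure (objective: alternative).

-- ===== PORT A =====
-- grid[r][c] (ports only read it under guards 0 ≤ r < h, 0 ≤ c < w; in range under Pre_)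
def cellAt (grid : List (List Int)) (r c : Nat) : Int := (grid.getD r []).getD c 7

def pvDirs : List (Int × Int) := [(-1, 0), (1, 0), (0, -1), (0, 1)]

def inWin (h w : Nat) (nr nc : Int) : Bool :=
  decide (0 ≤ nr ∧ nr < (h : Int) ∧ 0 ≤ nc ∧ nc < (w : Int))

-- is_adjacent_to_two(r, c)
def isAdj2 (grid : List (List Int)) (h w r c : Nat) : Bool :=
  pvDirs.any fun d =>
    let nr := (r : Int) + d.1
    let nc := (c : Int) + d.2
    inWin h w nr nc && cellAt grid nr.toNat nc.toNat == 2

-- has_adjacent_two / touches_left / touches_top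
def hasAdjTwo (grid : List (List Int)) (h w : Nat) (comp : List (Nat × Nat)) : Bool :=
  comp.any fun p => isAdj2 grid h w p.1 p.2
def touchesLeft (comp : List (Nat × Nat)) : Bool := comp.any fun p => p.2 == 0
def touchesTop (comp : List (Nat × Nat)) : Bool := comp.any fun p => p.1 == 0

-- visited[i][j] = True  (the 2-d boolean array as a function with pointwise update)
def vUpd (f : Nat × Nat → Bool) (p : Nat × Nat) : Nat × Nat → Bool :=
  fun q => if q = p then true else f q

-- number of not-yet-visited cells of the h×w window (termination measure for the BFS)
def unvisCount (h w : Nat) (v : Nat × Nat → Bool) : Nat :=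
  (((Finset.range h) ×ˢ (Finset.range w)).filter fun p => v p = false).card

-- inner for-loop of the BFS body: mark and enqueue the unvisited zero neighbours
def bfsExpand (grid : List (List Int)) (h w : Nat) (v : Nat × Nat → Bool) (r c : Nat) :
    (Nat × Nat → Bool) × List (Nat × Nat) :=
  pvDirs.foldl
    (fun st d =>
      let nr := (r : Int) + d.1
      let nc := (c : Int) + d.2
      if inWin h w nr nc && cellAt grid nr.toNat nc.toNat == 0 && !(st.1 (nr.toNat, nc.toNat))
      then (vUpd st.1 (nr.toNat, nc.toNat), st.2 ++ [(nr.toNat, nc.toNat)])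
      else st)
    (v, [])

theorem unvisCount_vUpd (h w : Nat) (v : Nat × Nat → Bool) (p : Nat × Nat)
    (hp : p ∈ (Finset.range h) ×ˢ (Finset.range w)) (hv : v p = false) :
    unvisCount h w (vUpd v p) + 1 = unvisCount h w v := by
  unfold unvisCount
  have hset : (((Finset.range h) ×ˢ (Finset.range w)).filter fun q => vUpd v p q = false)
      = (((Finset.range h) ×ˢ (Finset.range w)).filter fun q => v q = false).erase p := by
    ext q
    by_cases hq : q = p <;> simp [vUpd, hq, Finset.mem_filter, Finset.mem_erase]
  have hmem : p ∈ ((Finset.range h) ×ˢ (Finset.range w)).filter fun q => v q = false :=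
    Finset.mem_filter.mpr ⟨hp, hv⟩
  rw [hset, Finset.card_erase_of_mem hmem]
  have : 1 ≤ (((Finset.range h) ×ˢ (Finset.range w)).filter fun q => v q = false).card :=
    Finset.card_pos.mpr ⟨p, hmem⟩
  omega

theorem bfsExpand_measure_aux (grid : List (List Int)) (h w : Nat) (r c : Nat)
    (l : List (Int × Int)) (st : (Nat × Nat → Bool) × List (Nat × Nat)) :
    2 * unvisCount h w (l.foldl
      (fun st d =>
        let nr := (r : Int) + d.1
        let nc := (c : Int) + d.2
        if inWin h w nr nc && cellAt grid nr.toNat nc.toNat == 0 && !(st.1 (nr.toNat, nc.toNat))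
        then (vUpd st.1 (nr.toNat, nc.toNat), st.2 ++ [(nr.toNat, nc.toNat)])
        else st) st).1
      + (l.foldl
      (fun st d =>
        let nr := (r : Int) + d.1
        let nc := (c : Int) + d.2
        if inWin h w nr nc && cellAt grid nr.toNat nc.toNat == 0 && !(st.1 (nr.toNat, nc.toNat))
        then (vUpd st.1 (nr.toNat, nc.toNat), st.2 ++ [(nr.toNat, nc.toNat)])
        else st) st).2.length
      ≤ 2 * unvisCount h w st.1 + st.2.length := by
  induction l generalizing st with
  | nil => simp
  | cons d l ih =>
      simp only [List.foldl_cons]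
      refine le_trans (ih _) ?_
      set nr := (r : Int) + d.1
      set nc := (c : Int) + d.2
      by_cases hcond : (inWin h w nr nc && cellAt grid nr.toNat nc.toNat == 0
          && !(st.1 (nr.toNat, nc.toNat))) = true
      · simp only [hcond, if_pos]
        rw [Bool.and_eq_true, Bool.and_eq_true] at hcond
        have hwin : inWin h w nr nc = true := hcond.1.1
        have hv : st.1 (nr.toNat, nc.toNat) = false := by
          have := hcond.2
          simpa using this
        rw [← Bool.and_eq_true, ← Bool.and_eq_true] at hcond
        have hp : (nr.toNat, nc.toNat) ∈ (Finset.range h) ×ˢ (Finset.range w) := by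
          simp only [inWin, decide_eq_true_eq] at hwin
          simp only [Finset.mem_product, Finset.mem_range]
          omega
        have := unvisCount_vUpd h w st.1 (nr.toNat, nc.toNat) hp hv
        simp only [List.length_append, List.length_cons, List.length_nil]
        omega
      · simp [hcond]

theorem bfsExpand_measure (grid : List (List Int)) (h w : Nat) (v : Nat × Nat → Bool)
    (r c : Nat) :
    2 * unvisCount h w (bfsExpand grid h w v r c).1 + (bfsExpand grid h w v r c).2.length
      ≤ 2 * unvisCount h w v := by
  have := bfsExpand_measure_aux grid h w r c pvDirs (v, [])
  simpa [bfsExpand] using this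

-- while queue: …
def bfs (grid : List (List Int)) (h w : Nat) (v : Nat × Nat → Bool)
    (queue comp : List (Nat × Nat)) : (Nat × Nat → Bool) × List (Nat × Nat) :=
  match queue with
  | [] => (v, comp)
  | (r, c) :: qs =>
      bfs grid h w (bfsExpand grid h w v r c).1
        (qs ++ (bfsExpand grid h w v r c).2) (comp ++ [(r, c)])
termination_by 2 * unvisCount h w v + queue.length
decreasing_by
  have := bfsExpand_measure grid h w v r c
  simp only [List.length_append, List.length_cons]
  omega

-- new_grid[r][c] = color
def setCell (g : List (List Int)) (r c : Nat) (x : Int) : List (List Int) :=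
  g.set r ((g.getD r []).set c x)

-- body of the nested scan: one (i, j)
def processCell (grid : List (List Int)) (h w : Nat)
    (st : (Nat × Nat → Bool) × List (List Int)) (i j : Nat) :
    (Nat × Nat → Bool) × List (List Int) :=
  if cellAt grid i j == 0 && !(st.1 (i, j)) then
    let r := bfs grid h w (vUpd st.1 (i, j)) [(i, j)] []
    let comp := r.2
    if !(hasAdjTwo grid h w comp) then (r.1, st.2)
    else if touchesLeft comp && !(touchesTop comp) then (r.1, st.2)
    else
      let color : Int := if comp.length ≤ 8 then 8 else 1
      (r.1, comp.foldl (fun g p => setCell g p.1 p.2 color) st.2)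
  else st

def transform (grid : List (List Int)) : List (List Int) :=
  if grid.length = 0 ∨ (grid.headD []).length = 0 then grid.map (fun row => row)
  else
    let h := grid.length
    let w := (grid.headD []).length
    let st :=
      (List.range h).foldl
        (fun st i => (List.range w).foldl (fun st j => processCell grid h w st i j) st)
        ((fun _ => false), grid.map (fun row => row))
    st.2

-- ===== PORT B =====
-- find(x): while parent[x] != x: x = parent[x]   (fuel x+1 suffices: parent is
-- decreasing — every non-root pointer strictly decreases the index)
def ufFindAux (parent : Nat → Nat) : Nat → Nat → Nat
  | 0, x => x
  | f + 1, x => if parent x = x then x else ufFindAux parent f (parent x)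

def ufFind (parent : Nat → Nat) (x : Nat) : Nat := ufFindAux parent (x + 1) x

def ufUnion (parent : Nat → Nat) (a b : Nat) : Nat → Nat :=
  let ra := ufFind parent a
  let rb := ufFind parent b
  if ra = rb then parent
  else if ra < rb then fun y => if y = rb then ra else parent y
  else fun y => if y = ra then rb else parent y

-- zeros = [(r, c) for r in range(h) for c in range(w) if grid[r][c] == 0]
def zerosOf (grid : List (List Int)) (h w : Nat) : List (Nat × Nat) :=
  (List.range h).flatMap fun r =>
    ((List.range w).filter fun c => cellAt grid r c == 0).map fun c => (r, c)

-- the union pass over the zeros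
def ufBuild (grid : List (List Int)) (h w : Nat) : Nat → Nat :=
  (zerosOf grid h w).foldl
    (fun p rc =>
      let r := rc.1; let c := rc.2
      let p1 := if r + 1 < h && cellAt grid (r + 1) c == 0
                then ufUnion p (r * w + c) ((r + 1) * w + c) else p
      if c + 1 < w && cellAt grid r (c + 1) == 0
      then ufUnion p1 (r * w + c) (r * w + c + 1) else p1)
    (fun x => x)

-- near2 check of B (any over the four neighbours)
def near2 (grid : List (List Int)) (h w r c : Nat) : Bool :=
  [((r : Int) - 1, (c : Int)), ((r : Int) + 1, (c : Int)),
   ((r : Int), (c : Int) - 1), ((r : Int), (c : Int) + 1)].any fun d =>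
    inWin h w d.1 d.2 && cellAt grid d.1.toNat d.2.toNat == 2

-- the aggregates pass: size / top / left / two keyed by root
def aggregates (grid : List (List Int)) (h w : Nat) (parent : Nat → Nat) :
    PySem.Dict Nat Int × PySem.Dict Nat Bool × PySem.Dict Nat Bool × PySem.Dict Nat Bool :=
  (zerosOf grid h w).foldl
    (fun st rc =>
      let r := rc.1; let c := rc.2
      let root := ufFind parent (r * w + c)
      let sz := st.1.insert root (st.1.getD root 0 + 1)
      let tp := st.2.1.insert root (st.2.1.getD root false || decide (r = 0))
      let lf := st.2.2.1.insert root (st.2.2.1.getD root false || decide (c = 0))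
      let tw := st.2.2.2.insert root (st.2.2.2.getD root false || near2 grid h w r c)
      (sz, tp, lf, tw))
    (PySem.Dict.empty, PySem.Dict.empty, PySem.Dict.empty, PySem.Dict.empty)

def cellOut (grid : List (List Int)) (w : Nat) (parent : Nat → Nat)
    (ag : PySem.Dict Nat Int × PySem.Dict Nat Bool × PySem.Dict Nat Bool × PySem.Dict Nat Bool)
    (r c : Nat) : Int :=
  let v := cellAt grid r c
  if c < w && v == 0 then
    let root := ufFind parent (r * w + c)
    -- keys of a zero cell are always present; getD's defaults are never read
    if ag.2.2.2.getD root false && !(ag.2.2.1.getD root false && !(ag.2.1.getD root false))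
    then (if ag.1.getD root 0 ≤ 8 then (8 : Int) else 1)
    else v
  else v

def transform_alt (grid : List (List Int)) : List (List Int) :=
  if grid.length = 0 ∨ (grid.headD []).length = 0 then grid.map (fun row => row)
  else
    let h := grid.length
    let w := (grid.headD []).length
    let parent := ufBuild grid h w
    let ag := aggregates grid h w parent
    (List.range h).map fun r =>
      (List.range (grid.getD r []).length).map fun c => cellOut grid w parent ag r c

-- ===== PRECONDITION & SPEC =====
-- Pre_ excludes ragged grids whose first row is longer than a later row: there A
-- raises IndexError while scanning columns j < len(grid[0]).
def Pre_transform (grid : List (List Int)) : Prop :=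
  ∀ row ∈ grid, (grid.headD []).length ≤ row.length
instance (grid : List (List Int)) : Decidable (Pre_transform grid) := by
  unfold Pre_transform; infer_instance

def pvWitness_transform : List (List Int) := [[0, 2, 3], [0, 0, 2]]

def Spec_transform (grid : List (List Int)) (out : List (List Int)) : Prop := out = transform_alt grid
instance (grid : List (List Int)) (out : List (List Int)) : Decidable (Spec_transform grid out) := by unfold Spec_transform; infer_instance

-- ===== CLAIM (what is proved, stated in full; the proofs are below) =====
def Claim_equal_transform : Prop := ∀ (grid : List (List Int)), Dom_transform grid → Pre_transform grid → Spec_transform grid (transform grid)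

-- ===== LEMMAS AND PROOFS =====

-- ----- the zero-cell adjacency graph -----

def ZAt (grid : List (List Int)) (w : Nat) (p : Nat × Nat) : Prop :=
  p.1 < grid.length ∧ p.2 < w ∧ cellAt grid p.1 p.2 = 0

def Adj (grid : List (List Int)) (w : Nat) (p q : Nat × Nat) : Prop :=
  ZAt grid w p ∧ ZAt grid w q ∧
    ((p.1 = q.1 ∧ (p.2 + 1 = q.2 ∨ q.2 + 1 = p.2)) ∨
     (p.2 = q.2 ∧ (p.1 + 1 = q.1 ∨ q.1 + 1 = p.1)))

def Conn (grid : List (List Int)) (w : Nat) : Nat × Nat → Nat × Nat → Prop :=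
  Relation.ReflTransGen (Adj grid w)

theorem Adj_symm {grid : List (List Int)} {w : Nat} {p q : Nat × Nat}
    (h : Adj grid w p q) : Adj grid w q p := by
  obtain ⟨h1, h2, h3⟩ := h
  exact ⟨h2, h1, by tauto⟩

theorem Conn_symm {grid : List (List Int)} {w : Nat} {p q : Nat × Nat}
    (h : Conn grid w p q) : Conn grid w q p :=
  Relation.ReflTransGen.symmetric (fun _ _ hab => Adj_symm hab) h

theorem ZAt_of_Conn {grid : List (List Int)} {w : Nat} {p q : Nat × Nat}
    (h : Conn grid w p q) (hp : ZAt grid w p) : ZAt grid w q := by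
  induction h with
  | refl => exact hp
  | tail _ hadj _ => exact hadj.2.1

theorem Conn_class_iff {grid : List (List Int)} {w : Nat} {p q : Nat × Nat}
    (h : Conn grid w p q) (x : Nat × Nat) : (Conn grid w p x ↔ Conn grid w q x) :=
  ⟨fun hx => Relation.ReflTransGen.trans (Conn_symm h) hx,
   fun hx => Relation.ReflTransGen.trans h hx⟩

-- the class of a cell, its flags and its size
def ClassAdj2 (grid : List (List Int)) (h w : Nat) (s : Nat × Nat) : Prop :=
  ∃ q, Conn grid w s q ∧ isAdj2 grid h w q.1 q.2 = true
def ClassLeft (grid : List (List Int)) (w : Nat) (s : Nat × Nat) : Prop :=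
  ∃ q, Conn grid w s q ∧ q.2 = 0
def ClassTop (grid : List (List Int)) (w : Nat) (s : Nat × Nat) : Prop :=
  ∃ q, Conn grid w s q ∧ q.1 = 0
noncomputable def ClassSize (grid : List (List Int)) (w : Nat) (s : Nat × Nat) : Nat :=
  {q | Conn grid w s q}.ncard
def Good (grid : List (List Int)) (h w : Nat) (s : Nat × Nat) : Prop :=
  ClassAdj2 grid h w s ∧ ¬ (ClassLeft grid w s ∧ ¬ ClassTop grid w s)
noncomputable def colorOf (grid : List (List Int)) (w : Nat) (s : Nat × Nat) : Int :=
  if ClassSize grid w s ≤ 8 then 8 else 1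

theorem ClassAdj2_congr {grid : List (List Int)} {h w : Nat} {p q : Nat × Nat}
    (hc : Conn grid w p q) : (ClassAdj2 grid h w p ↔ ClassAdj2 grid h w q) := by
  unfold ClassAdj2
  exact exists_congr fun x => and_congr_left' (Conn_class_iff hc x)
theorem ClassLeft_congr {grid : List (List Int)} {w : Nat} {p q : Nat × Nat}
    (hc : Conn grid w p q) : (ClassLeft grid w p ↔ ClassLeft grid w q) := by
  unfold ClassLeft
  exact exists_congr fun x => and_congr_left' (Conn_class_iff hc x)
theorem ClassTop_congr {grid : List (List Int)} {w : Nat} {p q : Nat × Nat}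
    (hc : Conn grid w p q) : (ClassTop grid w p ↔ ClassTop grid w q) := by
  unfold ClassTop
  exact exists_congr fun x => and_congr_left' (Conn_class_iff hc x)
theorem ClassSize_congr {grid : List (List Int)} {w : Nat} {p q : Nat × Nat}
    (hc : Conn grid w p q) : ClassSize grid w p = ClassSize grid w q := by
  unfold ClassSize
  congr 1
  ext x
  exact Conn_class_iff hc x
theorem Good_congr {grid : List (List Int)} {h w : Nat} {p q : Nat × Nat}
    (hc : Conn grid w p q) : (Good grid h w p ↔ Good grid h w q) := by
  unfold Good
  rw [ClassAdj2_congr hc, ClassLeft_congr hc, ClassTop_congr hc]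
theorem colorOf_congr {grid : List (List Int)} {w : Nat} {p q : Nat × Nat}
    (hc : Conn grid w p q) : colorOf grid w p = colorOf grid w q := by
  unfold colorOf
  rw [ClassSize_congr hc]

-- ----- characterisation of bfsExpand -----

-- the neighbour cells bfsExpand looks at
def expCands (grid : List (List Int)) (h w r c : Nat) : List (Nat × Nat) :=
  pvDirs.filterMap fun d =>
    let nr := (r : Int) + d.1
    let nc := (c : Int) + d.2
    if inWin h w nr nc && cellAt grid nr.toNat nc.toNat == 0
    then some (nr.toNat, nc.toNat) else none

theorem mem_expCands {grid : List (List Int)} {w : Nat} {r c : Nat} (q : Nat × Nat)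
    (hz : ZAt grid w (r, c)) :
    q ∈ expCands grid grid.length w r c ↔ Adj grid w (r, c) q := by
  unfold expCands
  rw [List.mem_filterMap]
  constructor
  · rintro ⟨d, hd, hsome⟩
    simp only [pvDirs, List.mem_cons, List.not_mem_nil, or_false] at hd
    rcases hd with rfl | rfl | rfl | rfl <;>
    · simp only [] at hsome
      split at hsome
      · rename_i hguard
        rw [Bool.and_eq_true, beq_iff_eq] at hguard
        obtain ⟨hwin, hzero⟩ := hguard
        simp only [inWin, decide_eq_true_eq] at hwin
        obtain ⟨rfl⟩ := Option.some_inj.mp hsome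
        refine ⟨hz, ⟨by simp; omega, by simp; omega, ?_⟩, ?_⟩
        · simpa using hzero
        · simp only []
          omega
      · exact absurd hsome (by simp)
  · rintro ⟨-, hq, hrel⟩
    obtain ⟨hq1, hq2, hq3⟩ := hq
    have hcell : cellAt grid q.1 q.2 == 0 := beq_iff_eq.mpr hq3
    rcases hrel with ⟨he, hc2 | hc2⟩ | ⟨he, hc1 | hc1⟩
    · refine ⟨(0, 1), by simp [pvDirs], ?_⟩
      have : inWin grid.length w ((r : Int) + 0) ((c : Int) + 1) = true := by
        simp only [inWin, decide_eq_true_eq]; omega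
      simp only [this, Bool.true_and]
      have h1 : ((r : Int) + 0).toNat = q.1 := by omega
      have h2 : ((c : Int) + 1).toNat = q.2 := by omega
      rw [h1, h2, if_pos hcell]
    · refine ⟨(0, -1), by simp [pvDirs], ?_⟩
      have : inWin grid.length w ((r : Int) + 0) ((c : Int) + -1) = true := by
        simp only [inWin, decide_eq_true_eq]; omega
      simp only [this, Bool.true_and]
      have h1 : ((r : Int) + 0).toNat = q.1 := by omega
      have h2 : ((c : Int) + -1).toNat = q.2 := by omega
      rw [h1, h2, if_pos hcell]
    · refine ⟨(1, 0), by simp [pvDirs], ?_⟩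
      have : inWin grid.length w ((r : Int) + 1) ((c : Int) + 0) = true := by
        simp only [inWin, decide_eq_true_eq]; omega
      simp only [this, Bool.true_and]
      have h1 : ((r : Int) + 1).toNat = q.1 := by omega
      have h2 : ((c : Int) + 0).toNat = q.2 := by omega
      rw [h1, h2, if_pos hcell]
    · refine ⟨(-1, 0), by simp [pvDirs], ?_⟩
      have : inWin grid.length w ((r : Int) + -1) ((c : Int) + 0) = true := by
        simp only [inWin, decide_eq_true_eq]; omega
      simp only [this, Bool.true_and]
      have h1 : ((r : Int) + -1).toNat = q.1 := by omega
      have h2 : ((c : Int) + 0).toNat = q.2 := by omega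
      rw [h1, h2, if_pos hcell]

theorem expandFold_spec (grid : List (List Int)) (h w r c : Nat)
    (l : List (Int × Int)) (v : Nat × Nat → Bool) (acc : List (Nat × Nat)) :
    ∃ new,
      (l.foldl
        (fun st d =>
          let nr := (r : Int) + d.1
          let nc := (c : Int) + d.2
          if inWin h w nr nc && cellAt grid nr.toNat nc.toNat == 0 && !(st.1 (nr.toNat, nc.toNat))
          then (vUpd st.1 (nr.toNat, nc.toNat), st.2 ++ [(nr.toNat, nc.toNat)])
          else st) (v, acc))
        = (fun q => v q || decide (q ∈ new),  acc ++ new)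
      ∧ new.Nodup
      ∧ (∀ q, q ∈ new ↔ q ∈ (l.filterMap fun d =>
          let nr := (r : Int) + d.1
          let nc := (c : Int) + d.2
          if inWin h w nr nc && cellAt grid nr.toNat nc.toNat == 0
          then some (nr.toNat, nc.toNat) else none) ∧ v q = false) := by
  induction l generalizing v acc with
  | nil =>
      refine ⟨[], ?_, by simp, by simp⟩
      simp
  | cons d l ih =>
      simp only [List.foldl_cons, List.filterMap_cons]
      set nr := (r : Int) + d.1 with hnr
      set nc := (c : Int) + d.2 with hnc
      by_cases hg : (inWin h w nr nc && cellAt grid nr.toNat nc.toNat == 0) = true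
      · by_cases hv : v (nr.toNat, nc.toNat) = true
        · -- candidate but already visited: no step
          simp only [hg, hv, Bool.and_false, Bool.not_true, if_neg,
            Bool.false_eq_true, not_false_iff]
          obtain ⟨new, h1, h2, h3⟩ := ih v acc
          refine ⟨new, h1, h2, fun q => ?_⟩
          rw [h3 q]
          constructor
          · rintro ⟨hq, hvq⟩
            exact ⟨List.mem_cons_of_mem _ hq, hvq⟩
          · rintro ⟨hq, hvq⟩
            rcases List.mem_cons.mp hq with rfl | hq
            · exact absurd hv (by simp [hvq])
            · exact ⟨hq, hvq⟩
        · -- fresh candidate: mark and enqueue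
          have hcond : (inWin h w nr nc && cellAt grid nr.toNat nc.toNat == 0
              && !(v (nr.toNat, nc.toNat))) = true := by
            rw [Bool.and_eq_true]
            exact ⟨hg, by simp at hv ⊢; exact hv⟩
          simp only [hcond, if_pos]
          obtain ⟨new, h1, h2, h3⟩ := ih (vUpd v (nr.toNat, nc.toNat)) (acc ++ [(nr.toNat, nc.toNat)])
          have hnotmem : (nr.toNat, nc.toNat) ∉ new := by
            intro hmem
            have := (h3 _).mp hmem
            simp [vUpd] at this
          refine ⟨(nr.toNat, nc.toNat) :: new, ?_, ?_, fun q => ?_⟩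
          · rw [h1]
            refine Prod.ext ?_ (by simp)
            funext q
            by_cases hq : q = (nr.toNat, nc.toNat) <;> simp [vUpd, hq]
          · exact List.nodup_cons.mpr ⟨hnotmem, h2⟩
          · rw [List.mem_cons, h3 q]
            simp only [hg, if_pos, List.mem_cons]
            constructor
            · rintro (rfl | ⟨hq, hvq⟩)
              · exact ⟨Or.inl rfl, by simpa [Bool.not_eq_true'] using hv⟩
              · have hne : q ≠ (nr.toNat, nc.toNat) := by
                  rintro rfl
                  simp [vUpd] at hvq
                refine ⟨Or.inr hq, ?_⟩
                simpa [vUpd, hne] using hvq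
            · rintro ⟨rfl | hq, hvq⟩
              · exact Or.inl rfl
              · by_cases hne : q = (nr.toNat, nc.toNat)
                · exact Or.inl hne
                · exact Or.inr ⟨hq, by simpa [vUpd, hne] using hvq⟩
      · -- not a candidate
        have hcond : (inWin h w nr nc && cellAt grid nr.toNat nc.toNat == 0
            && !(v (nr.toNat, nc.toNat))) = false := by
          rw [Bool.eq_false_iff]
          intro hc
          rw [Bool.and_eq_true] at hc
          exact hg hc.1
        simp only [Bool.false_eq_true, if_neg, not_false_iff, hg]
        exact ih v acc

theorem bfsExpand_spec (grid : List (List Int)) (h w r c : Nat) (v : Nat × Nat → Bool) :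
    ∃ new,
      bfsExpand grid h w v r c = (fun q => v q || decide (q ∈ new), new)
      ∧ new.Nodup
      ∧ (∀ q, q ∈ new ↔ q ∈ expCands grid h w r c ∧ v q = false) := by
  obtain ⟨new, h1, h2, h3⟩ := expandFold_spec grid h w r c pvDirs v []
  exact ⟨new, by simpa [bfsExpand] using h1, h2, by simpa [expCands] using h3⟩

-- ----- the BFS loop -----

theorem closed_prop {grid : List (List Int)} {w : Nat} {f : Nat × Nat → Bool}
    (hcl : ∀ p, f p = true → ∀ t, Adj grid w p t → f t = true)
    {s p : Nat × Nat} (hconn : Conn grid w s p) (hs : f s = true) : f p = true := by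
  induction hconn with
  | refl => exact hs
  | tail _ hadj ih => exact hcl _ ih _ hadj

theorem bfs_main (grid : List (List Int)) (w : Nat) :
    ∀ (v : Nat × Nat → Bool) (q comp : List (Nat × Nat)),
    (∀ p ∈ q, v p = true ∧ ZAt grid w p) →
    (∀ p ∈ comp, v p = true) →
    (∀ p, v p = true → p ∉ q → ∀ t, Adj grid w p t → v t = true) →
    (comp ++ q).Nodup →
    (∀ p, v p = true → (bfs grid grid.length w v q comp).1 p = true) ∧
    (∀ p, (bfs grid grid.length w v q comp).1 p = true →
        (v p = true ∨ ∃ s ∈ q, Conn grid w s p)) ∧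
    (∀ p, (bfs grid grid.length w v q comp).1 p = true →
        ∀ t, Adj grid w p t → (bfs grid grid.length w v q comp).1 t = true) ∧
    (bfs grid grid.length w v q comp).2.Nodup ∧
    (∀ p, p ∈ (bfs grid grid.length w v q comp).2 ↔
        (p ∈ comp ∨ p ∈ q ∨ ((bfs grid grid.length w v q comp).1 p = true ∧ v p = false))) := by
  intro v q comp
  fun_induction bfs grid grid.length w v q comp with
  | case1 v comp =>
      intro _ _ Hclosed Hnodup
      refine ⟨fun p hp => hp, fun p hp => Or.inl hp,
        fun p hp t ht => Hclosed p hp (by simp) t ht, by simpa using Hnodup, fun p => ?_⟩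
      simp
  | case2 v comp r c qs ih =>
      intro Hq Hcomp Hclosed Hnodup
      obtain ⟨new, hst, hnew_nodup, hnew_mem⟩ := bfsExpand_spec grid grid.length w r c v
      rw [hst] at ih ⊢
      simp only [] at ih ⊢
      obtain ⟨hvrc, hzrc⟩ := Hq (r, c) List.mem_cons_self
      have hnew_sub : ∀ p ∈ new, Adj grid w (r, c) p ∧ v p = false := by
        intro p hp
        obtain ⟨hc, hf⟩ := (hnew_mem p).mp hp
        exact ⟨(mem_expCands p hzrc).mp hc, hf⟩
      have Hq' : ∀ p ∈ qs ++ new, (v p || decide (p ∈ new)) = true ∧ ZAt grid w p := by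
        intro p hp
        rcases List.mem_append.mp hp with hp | hp
        · exact ⟨by simp [(Hq p (List.mem_cons_of_mem _ hp)).1], (Hq p (List.mem_cons_of_mem _ hp)).2⟩
        · exact ⟨by simp [hp], (hnew_sub p hp).1.2.1⟩
      have Hcomp' : ∀ p ∈ comp ++ [(r, c)], (v p || decide (p ∈ new)) = true := by
        intro p hp
        rcases List.mem_append.mp hp with hp | hp
        · simp [Hcomp p hp]
        · simp only [List.mem_singleton] at hp
          simp [hp, hvrc]
      have Hclosed' : ∀ p, (v p || decide (p ∈ new)) = true → p ∉ qs ++ new →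
          ∀ t, Adj grid w p t → (v t || decide (t ∈ new)) = true := by
        intro p hp hpq t ht
        rw [Bool.or_eq_true] at hp
        rcases hp with hp | hp
        · by_cases hprc : p = (r, c)
          · subst hprc
            have hcand : t ∈ expCands grid grid.length w r c := (mem_expCands t hzrc).mpr ht
            by_cases hvt : v t = true
            · simp [hvt]
            · have : t ∈ new := (hnew_mem t).mpr ⟨hcand, by simpa using hvt⟩
              simp [this]
          · have hpnotq : p ∉ (r, c) :: qs := by
              intro hmem
              rcases List.mem_cons.mp hmem with h | h
              · exact hprc h
              · exact hpq (List.mem_append.mpr (Or.inl h))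
            simp [Hclosed p hp hpnotq t ht]
        · exact absurd (List.mem_append.mpr (Or.inr (by simpa using hp))) hpq
      have Hnodup' : (comp ++ [(r, c)] ++ (qs ++ new)).Nodup := by
        have h1 : (comp ++ [(r, c)] ++ qs).Nodup := by
          rw [List.append_assoc]
          simpa using Hnodup
        have hdisj : List.Disjoint (comp ++ [(r, c)] ++ qs) new := by
          intro a ha hanew
          have hfa : v a = false := (hnew_sub a hanew).2
          rcases List.mem_append.mp ha with ha | ha
          · rcases List.mem_append.mp ha with ha | ha
            · rw [Hcomp a ha] at hfa; exact absurd hfa (by simp)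
            · simp only [List.mem_singleton] at ha
              rw [ha, hvrc] at hfa; exact absurd hfa (by simp)
          · rw [(Hq a (List.mem_cons_of_mem _ ha)).1] at hfa; exact absurd hfa (by simp)
        have := List.Nodup.append h1 hnew_nodup hdisj
        simpa [List.append_assoc] using this
      obtain ⟨K1, K2, K3, K4, K5⟩ := ih Hq' (by simpa [List.append_assoc] using Hcomp') Hclosed'
        (by simpa [List.append_assoc] using Hnodup')
      refine ⟨?_, ?_, K3, K4, ?_⟩
      · intro p hp
        exact K1 p (by simp [hp])
      · intro p hp
        rcases K2 p hp with hp' | ⟨s, hs, hconn⟩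
        · rw [Bool.or_eq_true] at hp'
          rcases hp' with hp' | hp'
          · exact Or.inl hp'
          · refine Or.inr ⟨(r, c), List.mem_cons_self, Relation.ReflTransGen.single ?_⟩
            exact (hnew_sub p (by simpa using hp')).1
        · rcases List.mem_append.mp hs with hs | hs
          · exact Or.inr ⟨s, List.mem_cons_of_mem _ hs, hconn⟩
          · refine Or.inr ⟨(r, c), List.mem_cons_self, ?_⟩
            exact Relation.ReflTransGen.trans
              (Relation.ReflTransGen.single (hnew_sub s hs).1) hconn
      · intro p
        rw [K5 p]
        constructor
        · rintro (hp | hp | ⟨hb, hv'⟩)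
          · rcases List.mem_append.mp hp with hp | hp
            · exact Or.inl hp
            · simp only [List.mem_singleton] at hp
              exact Or.inr (Or.inl (by simp [hp]))
          · rcases List.mem_append.mp hp with hp | hp
            · exact Or.inr (Or.inl (List.mem_cons_of_mem _ hp))
            · exact Or.inr (Or.inr ⟨K1 p (by simp [hp]), (hnew_sub p hp).2⟩)
          · have : v p = false ∧ p ∉ new := by
              constructor
              · rcases Bool.eq_false_or_eq_true (v p) with h | h
                · rw [h] at hv'; exact absurd hv' (by simp)
                · exact h
              · intro hmem
                rw [Bool.or_eq_false_iff] at hv'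
                simpa [hmem] using hv'.2
            exact Or.inr (Or.inr ⟨hb, this.1⟩)
        · rintro (hp | hp | ⟨hb, hv0⟩)
          · exact Or.inl (List.mem_append.mpr (Or.inl hp))
          · rcases List.mem_cons.mp hp with rfl | hp
            · exact Or.inl (List.mem_append.mpr (Or.inr (by simp)))
            · exact Or.inr (Or.inl (List.mem_append.mpr (Or.inl hp)))
          · by_cases hmem : p ∈ new
            · exact Or.inr (Or.inl (List.mem_append.mpr (Or.inr hmem)))
            · exact Or.inr (Or.inr ⟨hb, by simp [hv0, hmem]⟩)

theorem bfs_start (grid : List (List Int)) (w : Nat) (v0 : Nat × Nat → Bool) (s : Nat × Nat)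
    (hs : ZAt grid w s) (hv0 : v0 s = false)
    (hcl : ∀ p, v0 p = true → ∀ t, Adj grid w p t → v0 t = true) :
    (∀ p, (bfs grid grid.length w (vUpd v0 s) [s] []).1 p = true ↔
        (v0 p = true ∨ Conn grid w s p)) ∧
    (bfs grid grid.length w (vUpd v0 s) [s] []).2.Nodup ∧
    (∀ p, p ∈ (bfs grid grid.length w (vUpd v0 s) [s] []).2 ↔ Conn grid w s p) := by
  have hself : vUpd v0 s s = true := by simp [vUpd]
  obtain ⟨K1, K2, K3, K4, K5⟩ := bfs_main grid w (vUpd v0 s) [s] []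
    (by
      intro p hp
      simp only [List.mem_singleton] at hp
      subst hp
      exact ⟨hself, hs⟩)
    (by simp)
    (by
      intro p hp hpq t ht
      have hne : p ≠ s := by simpa using hpq
      have hp0 : v0 p = true := by simpa [vUpd, hne] using hp
      have := hcl p hp0 t ht
      simp [vUpd, this])
    (by simp)
  have hBs : (bfs grid grid.length w (vUpd v0 s) [s] []).1 s = true := K1 s hself
  have hiff : ∀ p, (bfs grid grid.length w (vUpd v0 s) [s] []).1 p = true ↔
      (v0 p = true ∨ Conn grid w s p) := by
    intro p
    constructor
    · intro hp
      rcases K2 p hp with hp' | ⟨s', hs', hconn⟩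
      · by_cases hps : p = s
        · exact Or.inr (hps ▸ Relation.ReflTransGen.refl)
        · exact Or.inl (by simpa [vUpd, hps] using hp')
      · simp only [List.mem_singleton] at hs'
        subst hs'
        exact Or.inr hconn
    · rintro (hp | hconn)
      · exact K1 p (by simp [vUpd, hp])
      · exact closed_prop K3 hconn hBs
  refine ⟨hiff, K4, fun p => ?_⟩
  rw [K5 p]
  constructor
  · rintro (hp | hp | ⟨hb, hvu⟩)
    · simp at hp
    · simp only [List.mem_singleton] at hp
      exact hp ▸ Relation.ReflTransGen.refl
    · have hps : p ≠ s := by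
        intro h
        rw [h, hself] at hvu
        exact absurd hvu (by simp)
      rcases (hiff p).mp hb with h0 | hconn
      · rw [(by simpa [vUpd, hps] using hvu : v0 p = false)] at h0
        exact absurd h0 (by simp)
      · exact hconn
  · intro hconn
    by_cases hps : p = s
    · exact Or.inr (Or.inl (by simp [hps]))
    · have hv0p : v0 p = false := by
        rcases Bool.eq_false_or_eq_true (v0 p) with h | h
        · have := closed_prop hcl (Conn_symm hconn) h
          rw [this] at hv0
          exact absurd hv0 (by simp)
        · exact h
      refine Or.inr (Or.inr ⟨(hiff p).mpr (Or.inr hconn), ?_⟩)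
      simp [vUpd, hps, hv0p]

-- ----- writing a component into the grid -----

theorem getDrow_setCell (g : List (List Int)) (r c : Nat) (x : Int) (r' : Nat) :
    ((setCell g r c x).getD r' []) =
      if r' = r ∧ r < g.length then (g.getD r []).set c x else g.getD r' [] := by
  simp only [setCell, List.getD, List.getElem?_set]
  split_ifs <;> simp_all

theorem getD_set_eq (l : List Int) (c : Nat) (x : Int) (c' : Nat) :
    (l.set c x).getD c' 7 = if c' = c ∧ c < l.length then x else l.getD c' 7 := by
  simp only [List.getD, List.getElem?_set]
  split_ifs <;> simp_all

theorem cellAt_setCell (g : List (List Int)) (r c : Nat) (x : Int) (r' c' : Nat) :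
    cellAt (setCell g r c x) r' c' =
      if r' = r ∧ c' = c ∧ r < g.length ∧ c < (g.getD r []).length then x
      else cellAt g r' c' := by
  unfold cellAt
  rw [getDrow_setCell]
  by_cases h1 : r' = r ∧ r < g.length
  · obtain ⟨rfl, hr⟩ := h1
    rw [if_pos ⟨rfl, hr⟩, getD_set_eq]
    split_ifs <;> tauto
  · rw [if_neg h1, if_neg (by tauto)]

theorem length_setCell (g : List (List Int)) (r c : Nat) (x : Int) :
    (setCell g r c x).length = g.length := by simp [setCell]

theorem rowlen_setCell (g : List (List Int)) (r c : Nat) (x : Int) (r' : Nat) :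
    ((setCell g r c x).getD r' []).length = (g.getD r' []).length := by
  rw [getDrow_setCell]
  split_ifs with h
  · rw [List.length_set, (show r' = r from h.1)]
  · rfl

theorem writeFold_spec (color : Int) : ∀ (C : List (Nat × Nat)) (g : List (List Int)),
    ((C.foldl (fun g p => setCell g p.1 p.2 color) g).length = g.length) ∧
    (∀ r, ((C.foldl (fun g p => setCell g p.1 p.2 color) g).getD r []).length
        = (g.getD r []).length) ∧
    (∀ r c, cellAt (C.foldl (fun g p => setCell g p.1 p.2 color) g) r c =
       if (r, c) ∈ C ∧ r < g.length ∧ c < (g.getD r []).length then color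
       else cellAt g r c) := by
  intro C
  induction C with
  | nil => intro g; refine ⟨rfl, fun r => rfl, fun r c => ?_⟩; simp
  | cons p C ih =>
      intro g
      obtain ⟨a, b⟩ := p
      simp only [List.foldl_cons]
      obtain ⟨L1, L2, L3⟩ := ih (setCell g a b color)
      refine ⟨by rw [L1, length_setCell], fun r => by rw [L2 r, rowlen_setCell], fun r c => ?_⟩
      rw [L3 r c, length_setCell, rowlen_setCell, cellAt_setCell]
      by_cases hmem : (r, c) ∈ C ∧ r < g.length ∧ c < (g.getD r []).length
      · rw [if_pos hmem, if_pos ⟨List.mem_cons_of_mem _ hmem.1, hmem.2⟩]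
      · rw [if_neg hmem]
        by_cases hp : r = a ∧ c = b ∧ r < g.length ∧ c < (g.getD r []).length
        · have hlen : (g.getD a []).length = (g.getD r []).length := by rw [hp.1]
          rw [if_pos ⟨hp.1, hp.2.1, by omega, by omega⟩,
            if_pos ⟨by simp [hp.1, hp.2.1], hp.2.2⟩]
        · rw [if_neg (by
            intro h
            have hlen : (g.getD a []).length = (g.getD r []).length := by rw [h.1]
            exact hp ⟨h.1, h.2.1, by omega, by omega⟩)]
          rw [if_neg (by
            rintro ⟨hm, hr⟩
            rcases List.mem_cons.mp hm with he | hm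
            · have h1 : r = a := congrArg Prod.fst he
              have h2 : c = b := congrArg Prod.snd he
              exact hp ⟨h1, h2, hr⟩
            · exact hmem ⟨hm, hr⟩)]

-- ----- the outer scan invariant -----

def OutInv (grid : List (List Int)) (w : Nat)
    (st : (Nat × Nat → Bool) × List (List Int)) : Prop :=
  (∀ p, st.1 p = true → ∀ t, Adj grid w p t → st.1 t = true) ∧
  (∀ p, st.1 p = true → ZAt grid w p) ∧
  st.2.length = grid.length ∧
  (∀ r, (st.2.getD r []).length = (grid.getD r []).length) ∧
  (∀ r c, (st.1 (r, c) = true ∧ Good grid grid.length w (r, c) →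
            cellAt st.2 r c = colorOf grid w (r, c)) ∧
          (¬ (st.1 (r, c) = true ∧ Good grid grid.length w (r, c)) →
            cellAt st.2 r c = cellAt grid r c))

theorem comp_length {grid : List (List Int)} {w : Nat} {s : Nat × Nat}
    {C : List (Nat × Nat)} (hnd : C.Nodup) (hmem : ∀ q, q ∈ C ↔ Conn grid w s q) :
    C.length = ClassSize grid w s := by
  unfold ClassSize
  have hset : {q | Conn grid w s q} = (C.toFinset : Set (Nat × Nat)) := by
    ext q
    simp [hmem q]
  rw [hset, Set.ncard_coe_finset, List.toFinset_card_of_nodup hnd]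

theorem processCell_inv (grid : List (List Int)) (w : Nat)
    (hpre : ∀ r, r < grid.length → w ≤ (grid.getD r []).length)
    (st : (Nat × Nat → Bool) × List (List Int)) (hinv : OutInv grid w st)
    (i j : Nat) (hi : i < grid.length) (hj : j < w) :
    OutInv grid w (processCell grid grid.length w st i j) ∧
    (∀ p, st.1 p = true → (processCell grid grid.length w st i j).1 p = true) ∧
    (ZAt grid w (i, j) → (processCell grid grid.length w st i j).1 (i, j) = true) := by
  unfold processCell
  by_cases hc : (cellAt grid i j == 0 && !(st.1 (i, j))) = true
  swap
  · rw [if_neg hc]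
    refine ⟨hinv, fun p hp => hp, fun hz => ?_⟩
    rcases Bool.eq_false_or_eq_true (st.1 (i, j)) with hv | hv
    · exact hv
    · exact absurd (by simp [hv, beq_iff_eq.mpr hz.2.2]) hc
  · rw [if_pos hc]
    rw [Bool.and_eq_true] at hc
    have hz0 : cellAt grid i j = 0 := beq_iff_eq.mp hc.1
    have hvf : st.1 (i, j) = false := by simpa using hc.2
    have hzij : ZAt grid w (i, j) := ⟨hi, hj, hz0⟩
    obtain ⟨hcl0, hZ0, hlen0, hrow0, hval0⟩ := hinv
    obtain ⟨hiff, hnd, hmemC⟩ := bfs_start grid w st.1 (i, j) hzij hvf hcl0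
    simp only []
    set B := bfs grid grid.length w (vUpd st.1 (i, j)) [(i, j)] [] with hBdef
    have hmono : ∀ p, st.1 p = true → B.1 p = true := fun p hp => (hiff p).mpr (Or.inl hp)
    have hVZ : ∀ p, B.1 p = true → ZAt grid w p := by
      intro p hp
      rcases (hiff p).mp hp with h0 | hconn
      · exact hZ0 p h0
      · exact ZAt_of_Conn hconn hzij
    have hVcl : ∀ p, B.1 p = true → ∀ t, Adj grid w p t → B.1 t = true := by
      intro p hp t ht
      rcases (hiff p).mp hp with h0 | hconn
      · exact hmono t (hcl0 p h0 t ht)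
      · exact (hiff t).mpr (Or.inr (hconn.tail ht))
    have hcov : B.1 (i, j) = true := (hiff _).mpr (Or.inr Relation.ReflTransGen.refl)
    have hA2 : hasAdjTwo grid grid.length w B.2 = true ↔ ClassAdj2 grid grid.length w (i, j) := by
      simp only [hasAdjTwo, List.any_eq_true, ClassAdj2]
      exact ⟨fun ⟨q, hq, h⟩ => ⟨q, (hmemC q).mp hq, h⟩, fun ⟨q, hq, h⟩ => ⟨q, (hmemC q).mpr hq, h⟩⟩
    have hLft : touchesLeft B.2 = true ↔ ClassLeft grid w (i, j) := by
      simp only [touchesLeft, List.any_eq_true, ClassLeft, beq_iff_eq]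
      exact ⟨fun ⟨q, hq, h⟩ => ⟨q, (hmemC q).mp hq, h⟩, fun ⟨q, hq, h⟩ => ⟨q, (hmemC q).mpr hq, h⟩⟩
    have hTop : touchesTop B.2 = true ↔ ClassTop grid w (i, j) := by
      simp only [touchesTop, List.any_eq_true, ClassTop, beq_iff_eq]
      exact ⟨fun ⟨q, hq, h⟩ => ⟨q, (hmemC q).mp hq, h⟩, fun ⟨q, hq, h⟩ => ⟨q, (hmemC q).mpr hq, h⟩⟩
    have hsz : B.2.length = ClassSize grid w (i, j) := comp_length hnd hmemC
    have skipInv : ¬ Good grid grid.length w (i, j) → OutInv grid w (B.1, st.2) := by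
      intro hNG
      refine ⟨hVcl, hVZ, hlen0, hrow0, fun r c => ⟨?_, ?_⟩⟩
      · rintro ⟨hv, hg⟩
        rcases (hiff _).mp hv with h0 | hconn
        · exact (hval0 r c).1 ⟨h0, hg⟩
        · exact absurd ((Good_congr hconn).mpr hg) hNG
      · intro hng
        refine (hval0 r c).2 ?_
        rintro ⟨h0, hg⟩
        exact hng ⟨hmono _ h0, hg⟩
    by_cases h1 : hasAdjTwo grid grid.length w B.2 = true
    · rw [if_neg (by simp [h1])]
      by_cases h2 : (touchesLeft B.2 && !(touchesTop B.2)) = true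
      · rw [if_pos h2]
        rw [Bool.and_eq_true] at h2
        have hNG : ¬ Good grid grid.length w (i, j) := by
          rintro ⟨-, hg2⟩
          refine hg2 ⟨hLft.mp h2.1, fun hT => ?_⟩
          have := hTop.mpr hT
          rw [this] at h2
          exact absurd h2.2 (by simp)
        exact ⟨skipInv hNG, hmono, fun _ => hcov⟩
      · rw [if_neg h2]
        have hGood : Good grid grid.length w (i, j) := by
          refine ⟨hA2.mp h1, ?_⟩
          rintro ⟨hl, hnt⟩
          refine h2 ?_
          rw [Bool.and_eq_true, hLft]
          refine ⟨hl, ?_⟩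
          rcases Bool.eq_false_or_eq_true (touchesTop B.2) with ht | ht
          · exact absurd (hTop.mp ht) hnt
          · simp [ht]
        set color : Int := if B.2.length ≤ 8 then 8 else 1 with hcolor
        have hcoloreq : color = colorOf grid w (i, j) := by
          rw [hcolor, colorOf, hsz]
        obtain ⟨W1, W2, W3⟩ := writeFold_spec color B.2 st.2
        refine ⟨⟨hVcl, hVZ, W1.trans hlen0, fun r => (W2 r).trans (hrow0 r),
          fun r c => ⟨?_, ?_⟩⟩, hmono, fun _ => hcov⟩
        · rintro ⟨hv, hg⟩
          rw [W3 r c]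
          by_cases hm : (r, c) ∈ B.2
          · have hconn := (hmemC _).mp hm
            have hzrc : ZAt grid w (r, c) := ZAt_of_Conn hconn hzij
            rw [if_pos ⟨hm, by rw [hlen0]; exact hzrc.1, by
              rw [hrow0 r]
              exact lt_of_lt_of_le hzrc.2.1 (hpre r hzrc.1)⟩]
            rw [hcoloreq, colorOf_congr hconn]
          · rw [if_neg (by tauto)]
            rcases (hiff _).mp hv with h0 | hconn
            · exact (hval0 r c).1 ⟨h0, hg⟩
            · exact absurd ((hmemC _).mpr hconn) hm
        · intro hng
          rw [W3 r c]
          have hnm : (r, c) ∉ B.2 := by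
            intro hm
            have hconn := (hmemC _).mp hm
            exact hng ⟨(hiff _).mpr (Or.inr hconn), (Good_congr hconn).mp hGood⟩
          rw [if_neg (by tauto)]
          refine (hval0 r c).2 ?_
          rintro ⟨h0, hg⟩
          exact hng ⟨hmono _ h0, hg⟩
    · rw [if_pos (by simp [Bool.not_eq_true] at h1 ⊢; exact h1)]
      have hNG : ¬ Good grid grid.length w (i, j) := fun hg => h1 (hA2.mpr hg.1)
      exact ⟨skipInv hNG, hmono, fun _ => hcov⟩

theorem procFold_inv (grid : List (List Int)) (w : Nat)
    (hpre : ∀ r, r < grid.length → w ≤ (grid.getD r []).length) :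
    ∀ (cells : List (Nat × Nat)), (∀ p ∈ cells, p.1 < grid.length ∧ p.2 < w) →
    ∀ st, OutInv grid w st →
    OutInv grid w (cells.foldl (fun st p => processCell grid grid.length w st p.1 p.2) st) ∧
    (∀ p, st.1 p = true →
      (cells.foldl (fun st p => processCell grid grid.length w st p.1 p.2) st).1 p = true) ∧
    (∀ p ∈ cells, ZAt grid w p →
      (cells.foldl (fun st p => processCell grid grid.length w st p.1 p.2) st).1 p = true) := by
  intro cells
  induction cells with
  | nil => exact fun _ st hinv => ⟨hinv, fun p hp => hp, by simp⟩
  | cons p cells ih =>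
      intro hb st hinv
      obtain ⟨a, b⟩ := p
      obtain ⟨hpa, hpb⟩ := hb (a, b) List.mem_cons_self
      obtain ⟨inv1, mono1, cov1⟩ := processCell_inv grid w hpre st hinv a b hpa hpb
      simp only [List.foldl_cons]
      obtain ⟨inv2, mono2, cov2⟩ :=
        ih (fun q hq => hb q (List.mem_cons_of_mem _ hq)) _ inv1
      refine ⟨inv2, fun q hq => mono2 q (mono1 q hq), ?_⟩
      intro q hq hzq
      rcases List.mem_cons.mp hq with heq | hq
      · exact heq ▸ mono2 _ (cov1 (heq ▸ hzq))
      · exact cov2 q hq hzq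

theorem nestedFold_eq (grid : List (List Int)) (w : Nat)
    (l1 : List Nat) (init : (Nat × Nat → Bool) × List (List Int)) :
    l1.foldl (fun st i => (List.range w).foldl
        (fun st j => processCell grid grid.length w st i j) st) init
    = (l1.flatMap fun i => (List.range w).map fun j => (i, j)).foldl
        (fun st p => processCell grid grid.length w st p.1 p.2) init := by
  induction l1 generalizing init with
  | nil => rfl
  | cons i l1 ih =>
      simp only [List.foldl_cons, List.flatMap_cons, List.foldl_append, List.foldl_map]
      exact ih _

theorem transform_char (grid : List (List Int))
    (hpre : ∀ r, r < grid.length → (grid.headD []).length ≤ (grid.getD r []).length) :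
    (transform grid).length = grid.length ∧
    (∀ r, ((transform grid).getD r []).length = (grid.getD r []).length) ∧
    (∀ r c,
      (ZAt grid (grid.headD []).length (r, c) ∧
          Good grid grid.length (grid.headD []).length (r, c) →
        cellAt (transform grid) r c = colorOf grid (grid.headD []).length (r, c)) ∧
      (¬ (ZAt grid (grid.headD []).length (r, c) ∧
          Good grid grid.length (grid.headD []).length (r, c)) →
        cellAt (transform grid) r c = cellAt grid r c)) := by
  set w := (grid.headD []).length with hw
  unfold transform
  by_cases hguard : grid.length = 0 ∨ (grid.headD []).length = 0
  · rw [if_pos hguard]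
    have hmapid : grid.map (fun row => row) = grid := by simp
    rw [hmapid]
    refine ⟨rfl, fun r => rfl, fun r c => ⟨?_, fun _ => rfl⟩⟩
    rintro ⟨hz, -⟩
    rcases hguard with h | h
    · exact absurd hz.1 (by omega)
    · rw [← hw] at h
      exact absurd hz.2.1 (by omega)
  · rw [if_neg hguard]
    simp only []
    have hinit : OutInv grid w ((fun _ => false), grid.map (fun row => row)) := by
      refine ⟨fun p hp => by simp at hp, fun p hp => by simp at hp, by simp, by simp,
        fun r c => ⟨fun h => absurd h.1 (by simp), fun _ => by simp [cellAt]⟩⟩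
    rw [nestedFold_eq]
    set scan := (List.range grid.length).flatMap fun i => (List.range w).map fun j => (i, j)
      with hscan
    have hmemscan : ∀ p : Nat × Nat, p ∈ scan ↔ p.1 < grid.length ∧ p.2 < w := by
      intro p
      simp only [hscan, List.mem_flatMap, List.mem_map, List.mem_range]
      constructor
      · rintro ⟨a, ha, b, hb, rfl⟩
        exact ⟨ha, hb⟩
      · rintro ⟨h1, h2⟩
        exact ⟨p.1, h1, p.2, h2, rfl⟩
    obtain ⟨⟨fcl, fZ, flen, frow, fval⟩, fmono, fcov⟩ :=
      procFold_inv grid w hpre scan (fun p hp => (hmemscan p).mp hp) _ hinit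
    refine ⟨flen, frow, fun r c => ⟨?_, ?_⟩⟩
    · rintro ⟨hz, hg⟩
      refine (fval r c).1 ⟨?_, hg⟩
      exact fcov (r, c) ((hmemscan _).mpr ⟨hz.1, hz.2.1⟩) hz
    · intro hng
      refine (fval r c).2 ?_
      rintro ⟨hv, hg⟩
      exact hng ⟨fZ _ hv, hg⟩

-- ----- union-find basics -----

def UFInv (p : Nat → Nat) : Prop := ∀ x, p x ≤ x

theorem ufFindAux_irrel {p : Nat → Nat} (hp : UFInv p) :
    ∀ x f g, x < f → x < g → ufFindAux p f x = ufFindAux p g x := by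
  intro x
  induction x using Nat.strong_induction_on with
  | _ x ih =>
      intro f g hf hg
      match f, g with
      | f + 1, g + 1 =>
        simp only [ufFindAux]
        by_cases hfix : p x = x
        · simp [hfix]
        · have hlt : p x < x := Nat.lt_of_le_of_ne (hp x) hfix
          rw [if_neg hfix, if_neg hfix]
          exact ih (p x) hlt f g (by omega) (by omega)

theorem ufFind_fix_of_fix {p : Nat → Nat} {x : Nat} (hfix : p x = x) : ufFind p x = x := by
  simp [ufFind, ufFindAux, hfix]

theorem ufFind_step {p : Nat → Nat} (hp : UFInv p) {x : Nat} (hne : p x ≠ x) :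
    ufFind p x = ufFind p (p x) := by
  have hlt : p x < x := Nat.lt_of_le_of_ne (hp x) hne
  show ufFindAux p (x + 1) x = ufFindAux p (p x + 1) (p x)
  rw [show ufFindAux p (x + 1) x = ufFindAux p x (p x) by simp [ufFindAux, hne]]
  exact ufFindAux_irrel hp (p x) x (p x + 1) hlt (by omega)

theorem ufFind_fix {p : Nat → Nat} (hp : UFInv p) (x : Nat) :
    p (ufFind p x) = ufFind p x ∧ ufFind p x ≤ x := by
  induction x using Nat.strong_induction_on with
  | _ x ih =>
      by_cases hfix : p x = x
      · rw [ufFind_fix_of_fix hfix]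
        exact ⟨hfix, le_refl x⟩
      · have hlt : p x < x := Nat.lt_of_le_of_ne (hp x) hfix
        rw [ufFind_step hp hfix]
        obtain ⟨h1, h2⟩ := ih (p x) hlt
        exact ⟨h1, by omega⟩

-- the effect of redirecting one root
theorem ufFind_update {p : Nat → Nat} (hp : UFInv p) {ra rb : Nat}
    (hrb : p rb = rb) (hra : p ra = ra) (hlt : ra < rb) :
    UFInv (fun y => if y = rb then ra else p y) ∧
    ∀ z, ufFind (fun y => if y = rb then ra else p y) z =
      if ufFind p z = rb then ra else ufFind p z := by
  set p' := fun y => if y = rb then ra else p y with hp'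
  have hinv : UFInv p' := by
    intro y
    by_cases hy : y = rb
    · simp [hp', hy]; omega
    · simp [hp', hy, hp y]
  refine ⟨hinv, ?_⟩
  intro z
  induction z using Nat.strong_induction_on with
  | _ z ih =>
      by_cases hz : z = rb
      · subst hz
        have h1 : p' z ≠ z := by simp [hp']; omega
        rw [ufFind_step hinv h1]
        have h2 : p' z = ra := by simp [hp']
        rw [h2, ufFind_fix_of_fix (show p' ra = ra by simp [hp']; intro h; omega; ),
          ufFind_fix_of_fix hrb, if_pos rfl]
      · by_cases hfix : p z = z
        · rw [ufFind_fix_of_fix (show p' z = z by simp [hp', hz, hfix]),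
            ufFind_fix_of_fix hfix, if_neg hz]
        · have hlt2 : p z < z := Nat.lt_of_le_of_ne (hp z) hfix
          have hpz : p' z = p z := by simp [hp', hz]
          rw [ufFind_step hinv (by rw [hpz]; exact hfix), hpz, ih (p z) hlt2,
            ufFind_step hp hfix]

theorem ufUnion_find {p : Nat → Nat} (hp : UFInv p) (a b : Nat) :
    UFInv (ufUnion p a b) ∧
    ∀ z, ufFind (ufUnion p a b) z =
      if ufFind p z = ufFind p a ∨ ufFind p z = ufFind p b
      then min (ufFind p a) (ufFind p b) else ufFind p z := by
  have hra : p (ufFind p a) = ufFind p a := (ufFind_fix hp a).1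
  have hrb : p (ufFind p b) = ufFind p b := (ufFind_fix hp b).1
  unfold ufUnion
  simp only []
  by_cases h1 : ufFind p a = ufFind p b
  · rw [if_pos h1]
    refine ⟨hp, fun z => ?_⟩
    split_ifs with h2
    · rcases h2 with h2 | h2 <;> omega
    · rfl
  · rw [if_neg h1]
    by_cases h2 : ufFind p a < ufFind p b
    · rw [if_pos h2]
      obtain ⟨hinv, hchar⟩ := ufFind_update hp hrb hra h2
      refine ⟨hinv, fun z => ?_⟩
      rw [hchar z]
      split_ifs <;> omega
    · rw [if_neg h2]
      have h3 : ufFind p b < ufFind p a := by omega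
      obtain ⟨hinv, hchar⟩ := ufFind_update hp hra hrb h3
      refine ⟨hinv, fun z => ?_⟩
      rw [hchar z]
      split_ifs <;> omega

theorem ufUnion_inv {p : Nat → Nat} (hp : UFInv p) (a b : Nat) :
    UFInv (ufUnion p a b) := (ufUnion_find hp a b).1

theorem ufUnion_mono {p : Nat → Nat} (hp : UFInv p) (a b : Nat) {x y : Nat}
    (h : ufFind p x = ufFind p y) :
    ufFind (ufUnion p a b) x = ufFind (ufUnion p a b) y := by
  rw [(ufUnion_find hp a b).2 x, (ufUnion_find hp a b).2 y, h]

theorem ufUnion_join {p : Nat → Nat} (hp : UFInv p) (a b : Nat) :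
    ufFind (ufUnion p a b) a = ufFind (ufUnion p a b) b := by
  rw [(ufUnion_find hp a b).2 a, (ufUnion_find hp a b).2 b]
  split_ifs <;> omega

theorem ufUnion_back {p : Nat → Nat} (hp : UFInv p) (a b : Nat) {x y : Nat}
    (h : ufFind (ufUnion p a b) x = ufFind (ufUnion p a b) y) :
    ufFind p x = ufFind p y ∨
      ((ufFind p x = ufFind p a ∨ ufFind p x = ufFind p b) ∧
       (ufFind p y = ufFind p a ∨ ufFind p y = ufFind p b)) := by
  rw [(ufUnion_find hp a b).2 x, (ufUnion_find hp a b).2 y] at h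
  split_ifs at h <;> omega

-- ----- the zeros list and linear indices -----

theorem mem_zerosOf (grid : List (List Int)) (w : Nat) (p : Nat × Nat) :
    p ∈ zerosOf grid grid.length w ↔ ZAt grid w p := by
  obtain ⟨a, b⟩ := p
  simp only [zerosOf, List.mem_flatMap, List.mem_map, List.mem_filter, List.mem_range, ZAt]
  constructor
  · rintro ⟨r, hr, c, ⟨⟨hc, hz⟩, heq⟩⟩
    obtain ⟨rfl, rfl⟩ := Prod.mk.injEq .. ▸ heq
    exact ⟨hr, hc, beq_iff_eq.mp hz⟩
  · rintro ⟨h1, h2, h3⟩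
    exact ⟨a, h1, b, ⟨⟨h2, beq_iff_eq.mpr h3⟩, rfl⟩⟩

theorem nodup_zerosOf (grid : List (List Int)) (h w : Nat) : (zerosOf grid h w).Nodup := by
  unfold zerosOf
  rw [List.nodup_flatMap]
  constructor
  · intro r _
    exact (List.nodup_range.filter _).map (by intro a b hab; simpa using hab)
  · refine List.Pairwise.imp ?_ (List.pairwise_lt_range)
    intro a b hab x hxa hxb
    simp only [List.mem_map, List.mem_filter] at hxa hxb
    obtain ⟨c1, -, rfl⟩ := hxa
    obtain ⟨c2, -, heq⟩ := hxb
    have : b = a := congrArg Prod.fst heq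
    omega

def eIdx (w : Nat) (p : Nat × Nat) : Nat := p.1 * w + p.2

theorem eIdx_inj {w : Nat} {p q : Nat × Nat} (hp : p.2 < w) (hq : q.2 < w)
    (h : eIdx w p = eIdx w q) : p = q := by
  have hw : 0 < w := by omega
  unfold eIdx at h
  have h1 : p.1 = q.1 := by
    have e1 : (p.1 * w + p.2) / w = p.1 := by
      rw [mul_comm, Nat.mul_add_div hw, Nat.div_eq_of_lt hp, Nat.add_zero]
    have e2 : (q.1 * w + q.2) / w = q.1 := by
      rw [mul_comm, Nat.mul_add_div hw, Nat.div_eq_of_lt hq, Nat.add_zero]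
    rw [← e1, ← e2, h]
    
  have h2 : p.2 = q.2 := by
    have := congrArg (· % w) h
    simpa [mul_comm, Nat.mul_add_mod, Nat.mod_eq_of_lt hp, Nat.mod_eq_of_lt hq] using this
  exact Prod.ext h1 h2

-- "these linear indices belong to connected zero cells"
def SameComp (grid : List (List Int)) (w : Nat) (x y : Nat) : Prop :=
  x = y ∨ ∃ a b : Nat × Nat, ZAt grid w a ∧ ZAt grid w b ∧
    x = eIdx w a ∧ y = eIdx w b ∧ Conn grid w a b

theorem SameComp_trans {grid : List (List Int)} {w : Nat} {x y z : Nat}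
    (h1 : SameComp grid w x y) (h2 : SameComp grid w y z) : SameComp grid w x z := by
  rcases h1 with rfl | ⟨a1, b1, hza1, hzb1, rfl, rfl, hc1⟩
  · exact h2
  · rcases h2 with heq | ⟨a2, b2, hza2, hzb2, heq, rfl, hc2⟩
    · exact Or.inr ⟨a1, b1, hza1, hzb1, rfl, heq ▸ rfl, hc1⟩
    · have hb : b1 = a2 := eIdx_inj hzb1.2.1 hza2.2.1 heq
      exact Or.inr ⟨a1, b2, hza1, hzb2, rfl, rfl,
        Relation.ReflTransGen.trans hc1 (hb ▸ hc2)⟩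

theorem SameComp_symm {grid : List (List Int)} {w : Nat} {x y : Nat}
    (h : SameComp grid w x y) : SameComp grid w y x := by
  rcases h with rfl | ⟨a, b, hza, hzb, rfl, rfl, hc⟩
  · exact Or.inl rfl
  · exact Or.inr ⟨b, a, hzb, hza, rfl, rfl, Conn_symm hc⟩

-- ----- the union pass -----

def buildStep (grid : List (List Int)) (h w : Nat) (p : Nat → Nat) (rc : Nat × Nat) :
    Nat → Nat :=
  let r := rc.1; let c := rc.2
  let p1 := if r + 1 < h && cellAt grid (r + 1) c == 0
            then ufUnion p (r * w + c) ((r + 1) * w + c) else p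
  if c + 1 < w && cellAt grid r (c + 1) == 0
  then ufUnion p1 (r * w + c) (r * w + c + 1) else p1

theorem ufBuild_eq (grid : List (List Int)) (h w : Nat) :
    ufBuild grid h w = (zerosOf grid h w).foldl (buildStep grid h w) (fun x => x) := rfl

theorem buildStep_inv {grid : List (List Int)} {h w : Nat} {p : Nat → Nat}
    (hp : UFInv p) (rc : Nat × Nat) : UFInv (buildStep grid h w p rc) := by
  unfold buildStep
  simp only []
  split_ifs with h1 h2 h3 <;>
    first
      | exact ufUnion_inv (ufUnion_inv hp _ _) _ _
      | exact ufUnion_inv hp _ _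
      | exact hp

theorem buildStep_mono {grid : List (List Int)} {h w : Nat} {p : Nat → Nat}
    (hp : UFInv p) (rc : Nat × Nat) {x y : Nat} (hxy : ufFind p x = ufFind p y) :
    ufFind (buildStep grid h w p rc) x = ufFind (buildStep grid h w p rc) y := by
  unfold buildStep
  simp only []
  split_ifs with h1 h2 h3 <;>
    first
      | exact ufUnion_mono (ufUnion_inv hp _ _) _ _ (ufUnion_mono hp _ _ hxy)
      | exact ufUnion_mono hp _ _ hxy
      | exact hxy

theorem buildFold_mono {grid : List (List Int)} {h w : Nat} :
    ∀ (l : List (Nat × Nat)) (p0 : Nat → Nat), UFInv p0 → ∀ x y,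
      ufFind p0 x = ufFind p0 y →
      ufFind (l.foldl (buildStep grid h w) p0) x = ufFind (l.foldl (buildStep grid h w) p0) y := by
  intro l
  induction l with
  | nil => exact fun p0 _ x y hxy => hxy
  | cons rc l ih =>
      exact fun p0 hp x y hxy => ih _ (buildStep_inv hp rc) x y (buildStep_mono hp rc hxy)

theorem buildFold_edge {grid : List (List Int)} {h w : Nat} :
    ∀ (l : List (Nat × Nat)) (p0 : Nat → Nat), UFInv p0 → ∀ rc ∈ l,
      ((rc.1 + 1 < h && cellAt grid (rc.1 + 1) rc.2 == 0) = true →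
        ufFind (l.foldl (buildStep grid h w) p0) (rc.1 * w + rc.2)
          = ufFind (l.foldl (buildStep grid h w) p0) ((rc.1 + 1) * w + rc.2)) ∧
      ((rc.2 + 1 < w && cellAt grid rc.1 (rc.2 + 1) == 0) = true →
        ufFind (l.foldl (buildStep grid h w) p0) (rc.1 * w + rc.2)
          = ufFind (l.foldl (buildStep grid h w) p0) (rc.1 * w + rc.2 + 1)) := by
  intro l
  induction l with
  | nil => intro p0 _ rc hrc; simp at hrc
  | cons hd l ih =>
      intro p0 hp rc hrc
      rcases List.mem_cons.mp hrc with rfl | hrc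
      · simp only [List.foldl_cons]
        constructor
        · intro hcond
          apply buildFold_mono l _ (buildStep_inv hp rc)
          unfold buildStep
          simp only [hcond, if_pos]
          split_ifs with h2
          · exact ufUnion_mono (ufUnion_inv hp _ _) _ _
              (ufUnion_join hp (rc.1 * w + rc.2) ((rc.1 + 1) * w + rc.2))
          · exact ufUnion_join hp _ _
        · intro hcond
          apply buildFold_mono l _ (buildStep_inv hp rc)
          unfold buildStep
          simp only [hcond, if_pos]
          split_ifs with h1
          · exact ufUnion_join (ufUnion_inv hp _ _) _ _
          · exact ufUnion_join hp _ _
      · exact ih _ (buildStep_inv hp hd) rc hrc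

theorem union_back_same {grid : List (List Int)} {w : Nat} {p : Nat → Nat}
    (hp : UFInv p)
    (hback : ∀ x y, ufFind p x = ufFind p y → SameComp grid w x y)
    {a b : Nat × Nat} (hza : ZAt grid w a) (hzb : ZAt grid w b) (hconn : Conn grid w a b) :
    ∀ x y, ufFind (ufUnion p (eIdx w a) (eIdx w b)) x
        = ufFind (ufUnion p (eIdx w a) (eIdx w b)) y → SameComp grid w x y := by
  intro x y hxy
  rcases ufUnion_back hp _ _ hxy with h | ⟨hx, hy⟩
  · exact hback _ _ h
  · have hab : SameComp grid w (eIdx w a) (eIdx w b) :=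
      Or.inr ⟨a, b, hza, hzb, rfl, rfl, hconn⟩
    have h1 : SameComp grid w x (eIdx w b) := by
      rcases hx with hx | hx
      · exact SameComp_trans (hback _ _ hx) hab
      · exact hback _ _ hx
    have h2 : SameComp grid w (eIdx w b) y := by
      rcases hy with hy | hy
      · exact SameComp_trans (SameComp_symm hab) (SameComp_symm (hback _ _ hy))
      · exact SameComp_symm (hback _ _ hy)
    exact SameComp_trans h1 h2

theorem buildFold_back {grid : List (List Int)} {w : Nat} :
    ∀ (l : List (Nat × Nat)) (p0 : Nat → Nat), UFInv p0 →
      (∀ rc ∈ l, ZAt grid w rc) →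
      (∀ x y, ufFind p0 x = ufFind p0 y → SameComp grid w x y) →
      ∀ x y, ufFind (l.foldl (buildStep grid grid.length w) p0) x
          = ufFind (l.foldl (buildStep grid grid.length w) p0) y → SameComp grid w x y := by
  intro l
  induction l with
  | nil => exact fun p0 _ _ hback => hback
  | cons rc l ih =>
      intro p0 hp hZ hback
      simp only [List.foldl_cons]
      have hzrc : ZAt grid w rc := hZ rc List.mem_cons_self
      refine ih _ (buildStep_inv hp rc) (fun q hq => hZ q (List.mem_cons_of_mem _ hq)) ?_
      unfold buildStep
      simp only []
      by_cases h1 : (rc.1 + 1 < grid.length && cellAt grid (rc.1 + 1) rc.2 == 0) = true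
      · rw [if_pos h1]
        rw [Bool.and_eq_true] at h1
        have hzd : ZAt grid w (rc.1 + 1, rc.2) :=
          ⟨by simpa using h1.1, hzrc.2.1, beq_iff_eq.mp h1.2⟩
        have hconn : Conn grid w rc (rc.1 + 1, rc.2) :=
          Relation.ReflTransGen.single ⟨hzrc, hzd, Or.inr ⟨rfl, Or.inl rfl⟩⟩
        have hb1 := union_back_same hp hback hzrc hzd hconn
        have hp1 : UFInv (ufUnion p0 (eIdx w rc) (eIdx w (rc.1 + 1, rc.2))) :=
          ufUnion_inv hp _ _
        have hidx1 : eIdx w rc = rc.1 * w + rc.2 := rfl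
        have hidx2 : eIdx w (rc.1 + 1, rc.2) = (rc.1 + 1) * w + rc.2 := rfl
        rw [hidx1, hidx2] at hb1 hp1
        by_cases h2 : (rc.2 + 1 < w && cellAt grid rc.1 (rc.2 + 1) == 0) = true
        · rw [if_pos h2]
          rw [Bool.and_eq_true] at h2
          have hzr : ZAt grid w (rc.1, rc.2 + 1) :=
            ⟨hzrc.1, by simpa using h2.1, beq_iff_eq.mp h2.2⟩
          have hconn2 : Conn grid w rc (rc.1, rc.2 + 1) :=
            Relation.ReflTransGen.single ⟨hzrc, hzr, Or.inl ⟨rfl, Or.inl rfl⟩⟩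
          have hb2 := union_back_same hp1 hb1 hzrc hzr hconn2
          have hidx3 : eIdx w (rc.1, rc.2 + 1) = rc.1 * w + rc.2 + 1 := by
            simp [eIdx]; omega
          rw [hidx1, hidx3] at hb2
          exact hb2
        · rw [if_neg h2]
          exact hb1
      · rw [if_neg h1]
        by_cases h2 : (rc.2 + 1 < w && cellAt grid rc.1 (rc.2 + 1) == 0) = true
        · rw [if_pos h2]
          rw [Bool.and_eq_true] at h2
          have hzr : ZAt grid w (rc.1, rc.2 + 1) :=
            ⟨hzrc.1, by simpa using h2.1, beq_iff_eq.mp h2.2⟩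
          have hconn2 : Conn grid w rc (rc.1, rc.2 + 1) :=
            Relation.ReflTransGen.single ⟨hzrc, hzr, Or.inl ⟨rfl, Or.inl rfl⟩⟩
          have hb2 := union_back_same hp hback hzrc hzr hconn2
          have hidx3 : eIdx w (rc.1, rc.2 + 1) = rc.1 * w + rc.2 + 1 := by
            simp [eIdx]; omega
          have hidx1 : eIdx w rc = rc.1 * w + rc.2 := rfl
          rw [hidx1, hidx3] at hb2
          exact hb2
        · rw [if_neg h2]
          exact hback

theorem adj_roots {grid : List (List Int)} {w : Nat} {p q : Nat × Nat}
    (hadj : Adj grid w p q) :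
    ufFind (ufBuild grid grid.length w) (eIdx w p)
      = ufFind (ufBuild grid grid.length w) (eIdx w q) := by
  obtain ⟨hzp, hzq, hrel⟩ := hadj
  obtain ⟨hp1, hp2, hp3⟩ := hzp
  obtain ⟨hq1, hq2, hq3⟩ := hzq
  rw [ufBuild_eq]
  have hid : UFInv (fun x : Nat => x) := fun x => le_refl x
  rcases hrel with ⟨he, hc | hc⟩ | ⟨he, hc | hc⟩
  · -- right edge at p
    have hmem : p ∈ zerosOf grid grid.length w :=
      (mem_zerosOf grid w p).mpr ⟨hp1, hp2, hp3⟩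
    have := ((buildFold_edge (h := grid.length) (w := w) _ _ hid p hmem).2 (by
      rw [Bool.and_eq_true]
      refine ⟨decide_eq_true (show p.2 + 1 < w by omega), beq_iff_eq.mpr ?_⟩
      rw [he, hc]
      exact hq3))
    have hidx : eIdx w q = p.1 * w + p.2 + 1 := by
      unfold eIdx
      rw [← he, ← hc]
      omega
    rw [show eIdx w p = p.1 * w + p.2 from rfl, hidx]
    exact this
  · -- q is the left neighbour: right edge at q
    have hmem : q ∈ zerosOf grid grid.length w :=
      (mem_zerosOf grid w q).mpr ⟨hq1, hq2, hq3⟩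
    have := ((buildFold_edge (h := grid.length) (w := w) _ _ hid q hmem).2 (by
      rw [Bool.and_eq_true]
      refine ⟨decide_eq_true (show q.2 + 1 < w by omega), beq_iff_eq.mpr ?_⟩
      rw [← he, hc]
      exact hp3))
    have hidx : eIdx w p = q.1 * w + q.2 + 1 := by
      unfold eIdx
      rw [he]
      omega
    rw [hidx, show eIdx w q = q.1 * w + q.2 from rfl]
    exact this.symm
  · -- down edge at p
    have hmem : p ∈ zerosOf grid grid.length w :=
      (mem_zerosOf grid w p).mpr ⟨hp1, hp2, hp3⟩
    have := ((buildFold_edge (h := grid.length) (w := w) _ _ hid p hmem).1 (by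
      rw [Bool.and_eq_true]
      refine ⟨decide_eq_true (show p.1 + 1 < grid.length by omega), beq_iff_eq.mpr ?_⟩
      rw [hc, he]
      exact hq3))
    have hidx : eIdx w q = (p.1 + 1) * w + p.2 := by
      unfold eIdx
      rw [← he, ← hc]
    rw [show eIdx w p = p.1 * w + p.2 from rfl, hidx]
    exact this
  · -- up edge: down edge at q
    have hmem : q ∈ zerosOf grid grid.length w :=
      (mem_zerosOf grid w q).mpr ⟨hq1, hq2, hq3⟩
    have := ((buildFold_edge (h := grid.length) (w := w) _ _ hid q hmem).1 (by
      rw [Bool.and_eq_true]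
      refine ⟨decide_eq_true (show q.1 + 1 < grid.length by omega), beq_iff_eq.mpr ?_⟩
      rw [hc, ← he]
      exact hp3))
    have hidx : eIdx w p = (q.1 + 1) * w + q.2 := by
      unfold eIdx
      rw [he, ← hc]
    rw [hidx, show eIdx w q = q.1 * w + q.2 from rfl]
    exact this.symm

theorem roots_iff {grid : List (List Int)} {w : Nat} {p q : Nat × Nat}
    (hzp : ZAt grid w p) (hzq : ZAt grid w q) :
    ufFind (ufBuild grid grid.length w) (eIdx w p)
        = ufFind (ufBuild grid grid.length w) (eIdx w q) ↔ Conn grid w p q := by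
  constructor
  · intro h
    rw [ufBuild_eq] at h
    have hback := buildFold_back (zerosOf grid grid.length w) (fun x => x)
      (fun x => le_refl x) (fun rc hrc => (mem_zerosOf grid w rc).mp hrc)
      (fun x y hxy => Or.inl (by
        rw [ufFind_fix_of_fix rfl, ufFind_fix_of_fix rfl] at hxy
        exact hxy))
      _ _ h
    rcases hback with heq | ⟨a, b, hza, hzb, ha, hb, hconn⟩
    · rw [show p = q from eIdx_inj hzp.2.1 hzq.2.1 heq]
      exact Relation.ReflTransGen.refl
    · rw [show p = a from eIdx_inj hzp.2.1 hza.2.1 ha,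
        show q = b from eIdx_inj hzq.2.1 hzb.2.1 hb]
      exact hconn
  · intro hconn
    clear hzq
    induction hconn with
    | refl => rfl
    | tail _ hadj ih => exact ih.trans (adj_roots hadj)

-- ----- the grouping pass -----

theorem foldl_tuple4 {α V1 V2 V3 V4 : Type}
    (f1 : V1 → α → V1) (f2 : V2 → α → V2) (f3 : V3 → α → V3) (f4 : V4 → α → V4) :
    ∀ (xs : List α) (a : V1) (b : V2) (c : V3) (d : V4),
    xs.foldl (fun st x => (f1 st.1 x, f2 st.2.1 x, f3 st.2.2.1 x, f4 st.2.2.2 x)) (a, b, c, d)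
      = (xs.foldl f1 a, xs.foldl f2 b, xs.foldl f3 c, xs.foldl f4 d) := by
  intro xs
  induction xs with
  | nil => intro a b c d; rfl
  | cons x xs ih => intro a b c d; simp only [List.foldl_cons]; exact ih _ _ _ _

theorem dictGroup {V : Type} (key : Nat × Nat → Nat) (upd : V → (Nat × Nat) → V) (dflt : V) :
    ∀ (xs : List (Nat × Nat)) (d : PySem.Dict Nat V) (ρ : Nat),
    (xs.foldl (fun d x => d.insert (key x) (upd (d.getD (key x) dflt) x)) d).getD ρ dflt
      = (xs.filter fun x => key x == ρ).foldl upd (d.getD ρ dflt) := by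
  intro xs
  induction xs with
  | nil => intro d ρ; rfl
  | cons x xs ih =>
      intro d ρ
      simp only [List.foldl_cons, List.filter_cons]
      by_cases hx : key x = ρ
      · rw [if_pos (by simpa using hx), List.foldl_cons, ih]
        rw [PySem.Dict.getD_insert, if_pos hx.symm, hx]
      · rw [if_neg (by simpa using hx), ih]
        rw [PySem.Dict.getD_insert, if_neg (fun h => hx h.symm)]

theorem foldl_add_one {α : Type} (l : List α) (n : Int) :
    l.foldl (fun v _ => v + 1) n = n + l.length := by
  induction l generalizing n with
  | nil => simp
  | cons x l ih => simp [ih]; omega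

theorem foldl_or {α : Type} (l : List α) (f : α → Bool) (b : Bool) :
    l.foldl (fun v x => v || f x) b = (b || l.any f) := by
  induction l generalizing b with
  | nil => simp
  | cons x l ih => simp [ih, Bool.or_assoc]

theorem aggregates_eq (grid : List (List Int)) (h w : Nat) (parent : Nat → Nat) :
    aggregates grid h w parent =
      ((zerosOf grid h w).foldl (fun d rc => d.insert (ufFind parent (rc.1 * w + rc.2))
          (d.getD (ufFind parent (rc.1 * w + rc.2)) 0 + 1)) PySem.Dict.empty,
       (zerosOf grid h w).foldl (fun d rc => d.insert (ufFind parent (rc.1 * w + rc.2))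
          (d.getD (ufFind parent (rc.1 * w + rc.2)) false || decide (rc.1 = 0))) PySem.Dict.empty,
       (zerosOf grid h w).foldl (fun d rc => d.insert (ufFind parent (rc.1 * w + rc.2))
          (d.getD (ufFind parent (rc.1 * w + rc.2)) false || decide (rc.2 = 0))) PySem.Dict.empty,
       (zerosOf grid h w).foldl (fun d rc => d.insert (ufFind parent (rc.1 * w + rc.2))
          (d.getD (ufFind parent (rc.1 * w + rc.2)) false || near2 grid h w rc.1 rc.2)) PySem.Dict.empty) := by
  unfold aggregates
  exact foldl_tuple4
    (fun (d : PySem.Dict Nat Int) (rc : Nat × Nat) =>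
      d.insert (ufFind parent (rc.1 * w + rc.2)) (d.getD (ufFind parent (rc.1 * w + rc.2)) 0 + 1))
    (fun (d : PySem.Dict Nat Bool) (rc : Nat × Nat) =>
      d.insert (ufFind parent (rc.1 * w + rc.2))
        (d.getD (ufFind parent (rc.1 * w + rc.2)) false || decide (rc.1 = 0)))
    (fun (d : PySem.Dict Nat Bool) (rc : Nat × Nat) =>
      d.insert (ufFind parent (rc.1 * w + rc.2))
        (d.getD (ufFind parent (rc.1 * w + rc.2)) false || decide (rc.2 = 0)))
    (fun (d : PySem.Dict Nat Bool) (rc : Nat × Nat) =>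
      d.insert (ufFind parent (rc.1 * w + rc.2))
        (d.getD (ufFind parent (rc.1 * w + rc.2)) false || near2 grid h w rc.1 rc.2))
    (zerosOf grid h w) PySem.Dict.empty PySem.Dict.empty PySem.Dict.empty PySem.Dict.empty

theorem near2_eq (grid : List (List Int)) (h w r c : Nat) :
    near2 grid h w r c = isAdj2 grid h w r c := by
  simp only [near2, isAdj2, pvDirs, List.any_cons, List.any_nil, Bool.or_false,
    sub_eq_add_neg, add_zero]

theorem getD_map_range {β : Type} (f : Nat → β) (n r : Nat) (d : β) (hr : r < n) :
    ((List.range n).map f).getD r d = f r := by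
  rw [List.getD_eq_getElem _ _ (by simpa using hr)]
  simp

theorem getD_of_ge {β : Type} (l : List β) (n : Nat) (d : β) (h : l.length ≤ n) :
    l.getD n d = d := by
  rw [List.getD_eq_default]
  exact h

theorem cellOut_spec (grid : List (List Int)) (r c : Nat) (hr : r < grid.length) :
    (ZAt grid (grid.headD []).length (r, c) ∧
        Good grid grid.length (grid.headD []).length (r, c) →
      cellOut grid (grid.headD []).length
          (ufBuild grid grid.length (grid.headD []).length)
          (aggregates grid grid.length (grid.headD []).length
            (ufBuild grid grid.length (grid.headD []).length)) r c
        = colorOf grid (grid.headD []).length (r, c)) ∧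
    (¬ (ZAt grid (grid.headD []).length (r, c) ∧
        Good grid grid.length (grid.headD []).length (r, c)) →
      cellOut grid (grid.headD []).length
          (ufBuild grid grid.length (grid.headD []).length)
          (aggregates grid grid.length (grid.headD []).length
            (ufBuild grid grid.length (grid.headD []).length)) r c
        = cellAt grid r c) := by
  set w := (grid.headD []).length with hw
  set parent := ufBuild grid grid.length w with hparent
  unfold cellOut
  rw [aggregates_eq]
  simp only []
  by_cases hz : ZAt grid w (r, c)
  · rw [if_pos (by
      rw [Bool.and_eq_true]
      exact ⟨decide_eq_true hz.2.1, beq_iff_eq.mpr hz.2.2⟩)]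
    have hmemf : ∀ q, q ∈ ((zerosOf grid grid.length w).filter
        fun x => ufFind parent (x.1 * w + x.2) == ufFind parent (r * w + c)) ↔
        Conn grid w (r, c) q := by
      intro q
      rw [List.mem_filter, mem_zerosOf]
      constructor
      · rintro ⟨hzq, hroot⟩
        exact Conn_symm ((roots_iff hzq hz).mp (beq_iff_eq.mp hroot))
      · intro hconn
        have hzq := ZAt_of_Conn hconn hz
        exact ⟨hzq, beq_iff_eq.mpr ((roots_iff hzq hz).mpr (Conn_symm hconn))⟩
    have hnodupf : ((zerosOf grid grid.length w).filter
        fun x => ufFind parent (x.1 * w + x.2) == ufFind parent (r * w + c)).Nodup :=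
      (nodup_zerosOf grid grid.length w).filter _
    have hlenf := comp_length hnodupf hmemf
    rw [dictGroup (fun x => ufFind parent (x.1 * w + x.2)) (fun v _ => v + 1) 0,
      dictGroup (fun x => ufFind parent (x.1 * w + x.2))
        (fun v x => v || decide (x.1 = 0)) false,
      dictGroup (fun x => ufFind parent (x.1 * w + x.2))
        (fun v x => v || decide (x.2 = 0)) false,
      dictGroup (fun x => ufFind parent (x.1 * w + x.2))
        (fun v x => v || near2 grid grid.length w x.1 x.2) false]
    simp only [PySem.Dict.getD_empty]
    rw [foldl_add_one, foldl_or, foldl_or, foldl_or]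
    simp only [Bool.false_or, Int.zero_add]
    have hanytwo : ((zerosOf grid grid.length w).filter
          fun x => ufFind parent (x.1 * w + x.2) == ufFind parent (r * w + c)).any
          (fun x => near2 grid grid.length w x.1 x.2) = true
        ↔ ClassAdj2 grid grid.length w (r, c) := by
      rw [List.any_eq_true]
      unfold ClassAdj2
      exact ⟨fun ⟨q, hq, hn⟩ => ⟨q, (hmemf q).mp hq, by rwa [near2_eq] at hn⟩,
        fun ⟨q, hq, hn⟩ => ⟨q, (hmemf q).mpr hq, by rwa [near2_eq]⟩⟩
    have hanytop : ((zerosOf grid grid.length w).filter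
          fun x => ufFind parent (x.1 * w + x.2) == ufFind parent (r * w + c)).any
          (fun x => decide (x.1 = 0)) = true ↔ ClassTop grid w (r, c) := by
      rw [List.any_eq_true]
      unfold ClassTop
      exact ⟨fun ⟨q, hq, hn⟩ => ⟨q, (hmemf q).mp hq, by simpa using hn⟩,
        fun ⟨q, hq, hn⟩ => ⟨q, (hmemf q).mpr hq, by simpa using hn⟩⟩
    have hanyleft : ((zerosOf grid grid.length w).filter
          fun x => ufFind parent (x.1 * w + x.2) == ufFind parent (r * w + c)).any
          (fun x => decide (x.2 = 0)) = true ↔ ClassLeft grid w (r, c) := by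
      rw [List.any_eq_true]
      unfold ClassLeft
      exact ⟨fun ⟨q, hq, hn⟩ => ⟨q, (hmemf q).mp hq, by simpa using hn⟩,
        fun ⟨q, hq, hn⟩ => ⟨q, (hmemf q).mpr hq, by simpa using hn⟩⟩
    by_cases hgood : Good grid grid.length w (r, c)
    · rw [if_pos (by
        rw [Bool.and_eq_true]
        refine ⟨hanytwo.mpr hgood.1, ?_⟩
        by_cases hL : ClassLeft grid w (r, c)
        · have hT : ClassTop grid w (r, c) := by
            by_contra hT
            exact hgood.2 ⟨hL, hT⟩
          simp [hanytop.mpr hT]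
        · have : ((zerosOf grid grid.length w).filter
              fun x => ufFind parent (x.1 * w + x.2) == ufFind parent (r * w + c)).any
              (fun x => decide (x.2 = 0)) = false := by
            rcases Bool.eq_false_or_eq_true _ with h | h
            · exact absurd (hanyleft.mp h) hL
            · exact h
          simp [this])]
      refine ⟨fun _ => ?_, fun hng => absurd ⟨hz, hgood⟩ hng⟩
      rw [hlenf]
      unfold colorOf
      by_cases h8 : ClassSize grid w (r, c) ≤ 8
      · rw [if_pos (by exact_mod_cast h8), if_pos h8]
      · rw [if_neg (by exact_mod_cast h8), if_neg h8]
    · rw [if_neg (by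
        intro hcond
        rw [Bool.and_eq_true] at hcond
        refine hgood ⟨hanytwo.mp hcond.1, ?_⟩
        rintro ⟨hL, hT⟩
        have h1 := hanyleft.mpr hL
        have h2 : ((zerosOf grid grid.length w).filter
            fun x => ufFind parent (x.1 * w + x.2) == ufFind parent (r * w + c)).any
            (fun x => decide (x.1 = 0)) = false := by
          rcases Bool.eq_false_or_eq_true _ with h | h
          · exact absurd (hanytop.mp h) hT
          · exact h
        rw [h1, h2] at hcond
        simpa using hcond.2)]
      exact ⟨fun hpos => absurd hpos.2 hgood, fun _ => rfl⟩
  · rw [if_neg (by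
      intro hcond
      rw [Bool.and_eq_true] at hcond
      exact hz ⟨hr, by simpa using hcond.1, beq_iff_eq.mp hcond.2⟩)]
    exact ⟨fun hpos => absurd hpos.1 hz, fun _ => rfl⟩

theorem transform_alt_char (grid : List (List Int))
    (hpre : ∀ r, r < grid.length → (grid.headD []).length ≤ (grid.getD r []).length) :
    (transform_alt grid).length = grid.length ∧
    (∀ r, ((transform_alt grid).getD r []).length = (grid.getD r []).length) ∧
    (∀ r c,
      (ZAt grid (grid.headD []).length (r, c) ∧
          Good grid grid.length (grid.headD []).length (r, c) →
        cellAt (transform_alt grid) r c = colorOf grid (grid.headD []).length (r, c)) ∧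
      (¬ (ZAt grid (grid.headD []).length (r, c) ∧
          Good grid grid.length (grid.headD []).length (r, c)) →
        cellAt (transform_alt grid) r c = cellAt grid r c)) := by
  set w := (grid.headD []).length with hw
  unfold transform_alt
  by_cases hguard : grid.length = 0 ∨ (grid.headD []).length = 0
  · rw [if_pos hguard]
    have hmapid : grid.map (fun row => row) = grid := by simp
    rw [hmapid]
    refine ⟨rfl, fun r => rfl, fun r c => ⟨?_, fun _ => rfl⟩⟩
    rintro ⟨hz, -⟩
    rcases hguard with h | h
    · exact absurd hz.1 (by omega)
    · rw [← hw] at h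
      exact absurd hz.2.1 (by omega)
  · rw [if_neg hguard]
    simp only []
    have hlen : ((List.range grid.length).map fun r =>
        (List.range (grid.getD r []).length).map fun c =>
          cellOut grid w (ufBuild grid grid.length w)
            (aggregates grid grid.length w (ufBuild grid grid.length w)) r c).length
        = grid.length := by simp
    refine ⟨hlen, ?_, ?_⟩
    · intro r
      by_cases hr : r < grid.length
      · rw [getD_map_range _ _ _ _ hr]
        simp
      · rw [getD_of_ge _ _ _ (by
            simp only [List.length_map, List.length_range]
            exact Nat.le_of_not_lt hr),
          getD_of_ge _ _ _ (Nat.le_of_not_lt hr)]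
    · intro r c
      by_cases hr : r < grid.length
      · by_cases hc : c < (grid.getD r []).length
        · have hcell : cellAt ((List.range grid.length).map fun r =>
              (List.range (grid.getD r []).length).map fun c =>
                cellOut grid w (ufBuild grid grid.length w)
                  (aggregates grid grid.length w (ufBuild grid grid.length w)) r c) r c
              = cellOut grid w (ufBuild grid grid.length w)
                  (aggregates grid grid.length w (ufBuild grid grid.length w)) r c := by
            unfold cellAt
            rw [getD_map_range _ _ _ _ hr, getD_map_range _ _ _ _ hc]
          rw [hcell]
          exact cellOut_spec grid r c hr
        · have hcell : cellAt ((List.range grid.length).map fun r =>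
              (List.range (grid.getD r []).length).map fun c =>
                cellOut grid w (ufBuild grid grid.length w)
                  (aggregates grid grid.length w (ufBuild grid grid.length w)) r c) r c
              = 7 := by
            unfold cellAt
            rw [getD_map_range _ _ _ _ hr]
            exact getD_of_ge _ _ _ (by
              simp only [List.length_map, List.length_range]
              exact Nat.le_of_not_lt hc)
          have horig : cellAt grid r c = 7 := by
            unfold cellAt
            exact getD_of_ge _ _ _ (Nat.le_of_not_lt hc)
          refine ⟨?_, fun _ => by rw [hcell, horig]⟩
          rintro ⟨hz, -⟩
          exact absurd (lt_of_lt_of_le hz.2.1 (hpre r hr)) hc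
      · have hcell : cellAt ((List.range grid.length).map fun r =>
            (List.range (grid.getD r []).length).map fun c =>
              cellOut grid w (ufBuild grid grid.length w)
                (aggregates grid grid.length w (ufBuild grid grid.length w)) r c) r c
            = 7 := by
          unfold cellAt
          rw [getD_of_ge _ _ _ (show ((List.range grid.length).map fun r =>
            (List.range (grid.getD r []).length).map fun c =>
              cellOut grid w (ufBuild grid grid.length w)
                (aggregates grid grid.length w (ufBuild grid grid.length w)) r c).length ≤ r by
            simp only [List.length_map, List.length_range]
            exact Nat.le_of_not_lt hr)]
          rfl
        have horig : cellAt grid r c = 7 := by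
          unfold cellAt
          rw [getD_of_ge _ _ _ (Nat.le_of_not_lt hr)]
          rfl
        refine ⟨?_, fun _ => by rw [hcell, horig]⟩
        rintro ⟨hz, -⟩
        exact absurd hz.1 hr

theorem cellAt_getElem (l : List (List Int)) (r c : Nat) (h1 : r < l.length)
    (h2 : c < l[r].length) : l[r][c] = cellAt l r c := by
  unfold cellAt
  rw [List.getD_eq_getElem _ _ h1, List.getD_eq_getElem _ _ h2]

-- ===== VERDICT (by name: the statement is the Claim_ definition above) =====
theorem transform_spec : Claim_equal_transform := by
  intro grid _ hpre
  unfold Spec_transform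
  have hpre' : ∀ r, r < grid.length → (grid.headD []).length ≤ (grid.getD r []).length := by
    intro r hr
    apply hpre
    rw [List.getD_eq_getElem _ _ hr]
    exact List.getElem_mem hr
  obtain ⟨A1, A2, A3⟩ := transform_char grid hpre'
  obtain ⟨B1, B2, B3⟩ := transform_alt_char grid hpre'
  apply List.ext_getElem (by rw [A1, B1])
  intro r h1 h2
  have hrowlen : (transform grid)[r].length = (transform_alt grid)[r].length := by
    rw [show (transform grid)[r] = (transform grid).getD r [] from
        (List.getD_eq_getElem _ _ h1).symm,
      show (transform_alt grid)[r] = (transform_alt grid).getD r [] from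
        (List.getD_eq_getElem _ _ h2).symm,
      A2 r, B2 r]
  apply List.ext_getElem hrowlen
  intro c hc1 hc2
  rw [cellAt_getElem _ _ _ h1 hc1, cellAt_getElem _ _ _ h2 hc2]
  by_cases hcase : ZAt grid (grid.headD []).length (r, c) ∧
      Good grid grid.length (grid.headD []).length (r, c)
  · rw [(A3 r c).1 hcase, (B3 r c).1 hcase]
  · rw [(A3 r c).2 hcase, (B3 r c).2 hcase]
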